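-- pv_equiv track=rewrite | github.com/Nghia03092004/nghia03092004.github.io | project_euler/problem_514/solution.py | count_geoboard_shapes
-- ===== SOURCE A (Python) =====
-- from itertools import combinations
--
-- def convex_hull(points):
--     """Andrew's monotone chain convex hull algorithm."""
--     points = sorted(set(points))
--     if len(points) <= 1:
--         return points
--
--     def cross(O, A, B):
--         return (A[0] - O[0]) * (B[1] - O[1]) - (A[1] - O[1]) * (B[0] - O[0])
--
--     lower = []
--     for p in points:
--         while len(lower) >= 2 and cross(lower[-2], lower[-1], p) <= 0:
--             lower.pop()
--         lower.append(p)
--     upper = []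
--     for p in reversed(points):
--         while len(upper) >= 2 and cross(upper[-2], upper[-1], p) <= 0:
--             upper.pop()
--         upper.append(p)
--     return lower[:-1] + upper[:-1]
--
-- def polygon_area_2(pts):
--     """Twice the signed area of a polygon (shoelace formula)."""
--     n = len(pts)
--     area = 0
--     for i in range(n):
--         j = (i + 1) % n
--         area += pts[i][0] * pts[j][1] - pts[j][0] * pts[i][1]
--     return abs(area)
--
-- def normalize_polygon(pts):
--     """Normalize a polygon to canonical form (translation to origin, sorted)."""
--     if not pts:
--         return tuple()
--     min_x = min(p[0] for p in pts)
--     min_y = min(p[1] for p in pts)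
--     translated = tuple(sorted((p[0] - min_x, p[1] - min_y) for p in pts))
--     return translated
--
-- def rotate_90(pts, n):
--     """Rotate points 90 degrees clockwise on n x n grid."""
--     return [(p[1], n - 1 - p[0]) for p in pts]
--
-- def reflect_h(pts, n):
--     """Reflect across horizontal axis."""
--     return [(p[0], n - 1 - p[1]) for p in pts]
--
-- def canonical_form(pts, n):
--     """Find canonical form under D4 symmetry group."""
--     forms = []
--     current = list(pts)
--     for _ in range(4):
--         forms.append(normalize_polygon(current))
--         ref = reflect_h(current, n)
--         forms.append(normalize_polygon(ref))
--         current = rotate_90(current, n)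
--     return min(forms)
--
-- def count_geoboard_shapes(n):
--     """Count distinct convex shapes on n x n geoboard (using convex hulls as proxy)."""
--     grid_points = [(i, j) for i in range(n) for j in range(n)]
--     shapes = set()
--
--     # Enumerate subsets of size 3..n*n that form convex polygons
--     # For tractability, only consider convex hulls of small subsets
--     max_subset = min(6, len(grid_points))
--     for size in range(3, max_subset + 1):
--         for subset in combinations(grid_points, size):
--             hull = convex_hull(list(subset))
--             if len(hull) >= 3 and polygon_area_2(hull) > 0:
--                 # Only count if all points are on the hull (convex polygon)
--                 if len(hull) == len(subset):
--                     canon = canonical_form(hull, n)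
--                     shapes.add(canon)
--
--     return len(shapes)
-- ===== SOURCE B (Python) =====
-- from itertools import combinations
--
--
-- def _orient(a, b, c):
--     return (b[0] - a[0]) * (c[1] - a[1]) - (b[1] - a[1]) * (c[0] - a[0])
--
--
-- def _convex_position(pts):
--     """pts: lexicographically sorted distinct points.  True iff they are in
--     strictly convex position: every point strictly between the two lexicographic
--     extremes must lie strictly below every straddling chord (lower-hull vertex)
--     or strictly above every straddling chord (upper-hull vertex)."""
--     if len(pts) < 3:
--         return False
--     lo, hi = pts[0], pts[-1]
--     for q in pts:
--         if q == lo or q == hi: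
--             continue
--         below = all(_orient(a, q, b) > 0 for a in pts for b in pts if a < q < b)
--         above = all(_orient(a, q, b) < 0 for a in pts for b in pts if a < q < b)
--         if not (below or above):
--             return False
--     return True
--
--
-- def _normalize(pts):
--     if not pts:
--         return tuple()
--     min_x = min(p[0] for p in pts)
--     min_y = min(p[1] for p in pts)
--     return tuple(sorted((p[0] - min_x, p[1] - min_y) for p in pts))
--
--
-- def _canonical(pts, n):
--     """Canonical form under D4: the 8 symmetries written out as closed-form maps."""
--     m = n - 1
--     syms = [
--         lambda x, y: (x, y),
--         lambda x, y: (x, m - y),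
--         lambda x, y: (y, m - x),
--         lambda x, y: (y, x),
--         lambda x, y: (m - x, m - y),
--         lambda x, y: (m - x, y),
--         lambda x, y: (m - y, x),
--         lambda x, y: (m - y, m - x),
--     ]
--     return min(_normalize([f(x, y) for (x, y) in pts]) for f in syms)
--
--
-- def count_geoboard_shapes(n):
--     grid = [(i, j) for i in range(n) for j in range(n)]
--     shapes = set()
--     for size in range(3, min(6, len(grid)) + 1):
--         for subset in combinations(grid, size):
--             if _convex_position(subset):
--                 shapes.add(_canonical(subset, n))
--     return len(shapes)
-- ===== Notes on version B (the rewrite author's own statement) =====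
-- stated objective: alternative
-- what changed: B drops the convex-hull pipeline entirely: instead of building the monotone-chain hull of each subset and filtering on hull length and shoelace area, it tests convex position directly (every point strictly between the lexicographic extremes must see all straddling point pairs with one consistent strict orientation sign) and canonicalizes the accepted subset itself with the eight D4 symmetry maps written out in closed form.
import Mathlib
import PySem

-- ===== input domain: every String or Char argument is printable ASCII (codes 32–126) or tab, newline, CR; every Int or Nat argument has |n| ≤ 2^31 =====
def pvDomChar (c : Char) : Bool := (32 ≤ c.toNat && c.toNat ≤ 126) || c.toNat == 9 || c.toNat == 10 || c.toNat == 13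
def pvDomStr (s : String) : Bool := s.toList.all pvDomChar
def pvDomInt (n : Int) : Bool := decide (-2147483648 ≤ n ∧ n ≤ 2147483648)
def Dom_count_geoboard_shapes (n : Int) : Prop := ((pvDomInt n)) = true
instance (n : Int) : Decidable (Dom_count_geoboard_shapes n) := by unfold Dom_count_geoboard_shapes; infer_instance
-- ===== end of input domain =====

-- B replaces A's hull pipeline (build monotone-chain hull, check its length and area) by a direct
-- convex-position test: every point strictly between the lexicographic extremes must see all
-- straddling pairs with one consistent strict turn sign; accepted subsets are canonicalized
-- directly (no hull), with the eight D4 symmetries written out; objective: alternative (same cost).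

-- ===== PORT A =====
-- the cross product helper (identical text in Source A's convex_hull and Source B's _orient)
def pvCross (o a b : Int × Int) : Int :=
  (a.1 - o.1) * (b.2 - o.2) - (a.2 - o.2) * (b.1 - o.1)

-- the 'while len(ch) >= 2 and cross(ch[-2], ch[-1], p) <= 0: ch.pop()' loop of Source A's convex_hull
def pvPop (st : List (Int × Int)) (p : Int × Int) : List (Int × Int) :=
  if 2 ≤ st.length ∧
      pvCross (PySem.List.pyGetD st (-2) (0, 0)) (PySem.List.pyGetD st (-1) (0, 0)) p ≤ 0 then
    pvPop st.dropLast p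
  else st
termination_by st.length
decreasing_by
  rename_i h
  have : st.length ≠ 0 := by omega
  simp [List.length_dropLast]; omega

-- Python tuple comparison (lexicographic), used by both ports ('a < q < b', sorted, min(forms))
def pvPairLt (p q : Int × Int) : Bool := p.1 < q.1 || (p.1 == q.1 && p.2 < q.2)

def pvPolyLt : List (Int × Int) → List (Int × Int) → Bool
  | [], [] => false
  | [], _ :: _ => true
  | _ :: _, [] => false
  | a :: as, b :: bs => if pvPairLt a b then true else if pvPairLt b a then false else pvPolyLt as bs

-- min(forms) for a list of polygons; [] branch is unreachable (forms always has 8 entries)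
def pvMinPoly (forms : List (List (Int × Int))) : List (Int × Int) :=
  match forms with
  | [] => []
  | h :: t => t.foldl (fun m x => if pvPolyLt x m then x else m) h

def convex_hull (points : List (Int × Int)) : List (Int × Int) :=
  let pts := PySem.List.sorted2 (PySem.Set.ofList points) Prod.fst Prod.snd
  if pts.length ≤ 1 then pts
  else
    let lower := pts.foldl (fun st p => pvPop st p ++ [p]) []
    let upper := pts.reverse.foldl (fun st p => pvPop st p ++ [p]) []
    PySem.List.slice lower none (some (-1)) ++ PySem.List.slice upper none (some (-1))

def polygon_area_2 (pts : List (Int × Int)) : Int :=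
  let n : Int := pts.length
  let area := (PySem.List.pyRange 0 n 1).foldl
    (fun area i =>
      let j := PySem.Int.mod (i + 1) n
      area + ((PySem.List.pyGetD pts i (0, 0)).1 * (PySem.List.pyGetD pts j (0, 0)).2
        - (PySem.List.pyGetD pts j (0, 0)).1 * (PySem.List.pyGetD pts i (0, 0)).2)) 0
  |area|

-- min(p[0] for p in pts): pts is nonempty here, so min? is some and the getD 0 is unreachable
def normalize_polygon (pts : List (Int × Int)) : List (Int × Int) :=
  if pts = [] then []
  else
    let min_x := (PySem.List.min? (pts.map Prod.fst) (fun x => x)).getD 0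
    let min_y := (PySem.List.min? (pts.map Prod.snd) (fun x => x)).getD 0
    PySem.List.sorted2 (pts.map (fun p => (p.1 - min_x, p.2 - min_y))) Prod.fst Prod.snd

def rotate_90 (pts : List (Int × Int)) (n : Int) : List (Int × Int) :=
  pts.map (fun p => (p.2, n - 1 - p.1))

def reflect_h (pts : List (Int × Int)) (n : Int) : List (Int × Int) :=
  pts.map (fun p => (p.1, n - 1 - p.2))

def canonical_form (pts : List (Int × Int)) (n : Int) : List (Int × Int) :=
  let res := (PySem.List.pyRange 0 4 1).foldl
    (fun (fc : List (List (Int × Int)) × List (Int × Int)) _ =>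
      (fc.1 ++ [normalize_polygon fc.2] ++ [normalize_polygon (reflect_h fc.2 n)],
        rotate_90 fc.2 n))
    ([], pts)
  pvMinPoly res.1

def count_geoboard_shapes (n : Int) : Int :=
  let grid_points :=
    (PySem.List.pyRange 0 n 1).flatMap (fun i => (PySem.List.pyRange 0 n 1).map (fun j => (i, j)))
  let max_subset : Int := min 6 (grid_points.length : Int)
  let shapes := (PySem.List.pyRange 3 (max_subset + 1) 1).foldl
    (fun sh size =>
      (PySem.List.combinations grid_points size.toNat).foldl
        (fun sh subset =>
          let hull := convex_hull subset
          if 3 ≤ hull.length ∧ 0 < polygon_area_2 hull then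
            if hull.length = subset.length then PySem.Set.add sh (canonical_form hull n) else sh
          else sh)
        sh)
    (PySem.Set.empty)
  (shapes.length : Int)

-- ===== PORT B =====
-- Source B's _convex_position: a subset (lex-sorted, distinct) is accepted iff every point strictly
-- between pts[0] and pts[-1] sees all straddling pairs with one consistent strict turn sign
def pvB_convex_position (pts : List (Int × Int)) : Bool :=
  if pts.length < 3 then false
  else
    let lo := PySem.List.pyGetD pts 0 (0, 0)
    let hi := PySem.List.pyGetD pts (-1) (0, 0)
    pts.all fun q =>
      if q == lo || q == hi then true
      else
        (pts.all fun a => pts.all fun b =>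
          if pvPairLt a q && pvPairLt q b then decide (0 < pvCross a q b) else true)
        || (pts.all fun a => pts.all fun b =>
          if pvPairLt a q && pvPairLt q b then decide (pvCross a q b < 0) else true)

-- Source B's _canonical: the 8 D4 symmetries written out as closed-form point maps
def pvB_canonical (pts : List (Int × Int)) (n : Int) : List (Int × Int) :=
  let m := n - 1
  pvMinPoly
    [ normalize_polygon (pts.map (fun p => (p.1, p.2)))
    , normalize_polygon (pts.map (fun p => (p.1, m - p.2)))
    , normalize_polygon (pts.map (fun p => (p.2, m - p.1)))
    , normalize_polygon (pts.map (fun p => (p.2, p.1)))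
    , normalize_polygon (pts.map (fun p => (m - p.1, m - p.2)))
    , normalize_polygon (pts.map (fun p => (m - p.1, p.2)))
    , normalize_polygon (pts.map (fun p => (m - p.2, p.1)))
    , normalize_polygon (pts.map (fun p => (m - p.2, m - p.1))) ]

def count_geoboard_shapes_alt (n : Int) : Int :=
  let grid :=
    (PySem.List.pyRange 0 n 1).flatMap (fun i => (PySem.List.pyRange 0 n 1).map (fun j => (i, j)))
  let shapes := (PySem.List.pyRange 3 (min 6 (grid.length : Int) + 1) 1).foldl
    (fun sh size =>
      (PySem.List.combinations grid size.toNat).foldl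
        (fun sh subset =>
          if pvB_convex_position subset then PySem.Set.add sh (pvB_canonical subset n) else sh)
        sh)
    (PySem.Set.empty)
  (shapes.length : Int)

-- ===== PRECONDITION & SPEC =====
def Spec_count_geoboard_shapes (n : Int) (out : Int) : Prop := out = count_geoboard_shapes_alt n
instance (n : Int) (out : Int) : Decidable (Spec_count_geoboard_shapes n out) := by unfold Spec_count_geoboard_shapes; infer_instance

-- ===== CLAIM (what is proved, stated in full; the proofs are below) =====
def Claim_equal_count_geoboard_shapes : Prop := ∀ (n : Int), Dom_count_geoboard_shapes n → Spec_count_geoboard_shapes n (count_geoboard_shapes n)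

-- ===== LEMMAS AND PROOFS =====
def LtP (p q : Int × Int) : Prop := pvPairLt p q = true

theorem ltp_iff {p q : Int × Int} : LtP p q ↔ (p.1 < q.1 ∨ (p.1 = q.1 ∧ p.2 < q.2)) := by
  simp [LtP, pvPairLt]

theorem ltp_trans {a b c : Int × Int} (h1 : LtP a b) (h2 : LtP b c) : LtP a c := by
  rw [ltp_iff] at *; omega

theorem ltp_asymm {a b : Int × Int} (h1 : LtP a b) (h2 : LtP b a) : False := by
  rw [ltp_iff] at *; omega

theorem ltp_irrefl {a : Int × Int} (h : LtP a a) : False := by rw [ltp_iff] at h; omega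

theorem ltp_x_le {a b : Int × Int} (h : LtP a b) : a.1 ≤ b.1 := by rw [ltp_iff] at h; omega

-- cross-product algebra
theorem cross_quad (a b c d : Int × Int) :
    pvCross a b c + pvCross a c d = pvCross a b d + pvCross b c d := by
  simp [pvCross]; ring

theorem cross_swap13 (a q b : Int × Int) : pvCross b q a = -pvCross a q b := by
  simp [pvCross]; ring

theorem cross_self12 (a b : Int × Int) : pvCross a a b = 0 := by simp [pvCross]

-- a strictly positive turn forces a strict x-step on its first edge
theorem xlt_of_pos {a b c : Int × Int} (h1 : LtP a b) (h2 : LtP b c)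
    (h3 : 0 < pvCross a b c) : a.1 < b.1 := by
  rw [ltp_iff] at h1 h2
  rcases h1 with h | ⟨hx, hy⟩
  · exact h
  · exfalso
    have hbc : b.1 ≤ c.1 := by omega
    have : pvCross a b c = -(b.2 - a.2) * (c.1 - a.1) := by simp [pvCross, hx]; ring
    nlinarith

theorem lemT {a b c d : Int × Int} (hab : LtP a b) (hbc : LtP b c) (hcd : LtP c d)
    (h1 : 0 < pvCross a b c) (h2 : 0 < pvCross b c d) :
    0 < pvCross a b d ∧ 0 < pvCross a c d := by
  have hxab : a.1 < b.1 := xlt_of_pos hab hbc h1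
  have hxbc : b.1 < c.1 := xlt_of_pos hbc hcd h2
  have hxcd : c.1 ≤ d.1 := ltp_x_le hcd
  constructor
  · -- e(a,b,d)*(cx-bx) = e(a,b,c)*(dx-bx) + e(b,c,d)*(bx-ax)
    have key : pvCross a b d * (c.1 - b.1) =
        pvCross a b c * (d.1 - b.1) + pvCross b c d * (b.1 - a.1) := by
      simp [pvCross]; ring
    nlinarith
  · -- e(a,c,d)*(cx-bx) = e(a,b,c)*(dx-cx) + e(b,c,d)*(cx-ax)
    have key : pvCross a c d * (c.1 - b.1) =
        pvCross a b c * (d.1 - c.1) + pvCross b c d * (c.1 - a.1) := by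
      simp [pvCross]; ring
    nlinarith

theorem lemT2 {a b c d : Int × Int} (hab : LtP a b) (hbc : LtP b c) (hcd : LtP c d)
    (h1 : pvCross a b c ≤ 0) (h2 : 0 < pvCross a c d) : 0 < pvCross b c d := by
  have hxac : a.1 < c.1 := xlt_of_pos (ltp_trans hab hbc) hcd h2
  have hxab : a.1 ≤ b.1 := ltp_x_le hab
  have hxbc : b.1 ≤ c.1 := ltp_x_le hbc
  have hxcd : c.1 ≤ d.1 := ltp_x_le hcd
  rcases lt_or_eq_of_le hxbc with hlt | heq
  · have key : pvCross a c d * (c.1 - b.1) =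
        pvCross a b c * (d.1 - c.1) + pvCross b c d * (c.1 - a.1) := by
      simp [pvCross]; ring
    nlinarith
  · -- b.1 = c.1 : vertical edge b→c; derive a contradiction
    exfalso
    have hyb : b.2 < c.2 := by rw [ltp_iff] at hbc; omega
    have h1' : pvCross a b c = (b.1 - a.1) * (c.2 - b.2) := by
      simp [pvCross, heq]; ring
    have hax : a.1 = b.1 := by nlinarith
    have h2' : pvCross a c d = -(c.2 - a.2) * (d.1 - a.1) := by
      have : a.1 = c.1 := by omega
      simp [pvCross, this]; ring
    have hya : a.2 < b.2 := by rw [ltp_iff] at hab; omega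
    nlinarith

theorem lemP2 {t u z p : Int × Int} (h1 : LtP t u) (h2 : LtP u z) (h3 : LtP z p)
    (e1 : pvCross t u z ≤ 0) (e2 : pvCross t z p ≤ 0) : pvCross t u p ≤ 0 := by
  have hxtu : t.1 ≤ u.1 := ltp_x_le h1
  have hxuz : u.1 ≤ z.1 := ltp_x_le h2
  have hxzp : z.1 ≤ p.1 := ltp_x_le h3
  rcases lt_or_eq_of_le (le_trans hxtu hxuz) with hlt | heq
  · have key : pvCross t u p * (z.1 - t.1) =
        pvCross t z p * (u.1 - t.1) + pvCross t u z * (p.1 - t.1) := by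
      simp [pvCross]; ring
    nlinarith
  · have htu : t.1 = u.1 := by omega
    have hyu : t.2 < u.2 := by rw [ltp_iff] at h1; omega
    have : pvCross t u p = -(u.2 - t.2) * (p.1 - t.1) := by
      simp [pvCross, htu]; ring
    nlinarith

theorem lemP3 {t q u r p : Int × Int} (h1 : LtP t q) (h2 : LtP q u) (h3 : LtP u r)
    (h4 : LtP r p) (e1 : pvCross q u r ≤ 0) (e2 : pvCross t q p ≤ 0)
    (e3 : pvCross t r p ≤ 0) : pvCross t u p ≤ 0 := by
  have hxtq : t.1 ≤ q.1 := ltp_x_le h1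
  have hxqu : q.1 ≤ u.1 := ltp_x_le h2
  have hxur : u.1 ≤ r.1 := ltp_x_le h3
  have hxrp : r.1 ≤ p.1 := ltp_x_le h4
  rcases lt_or_eq_of_le (le_trans hxqu hxur) with hlt | heq
  · have key : pvCross t u p * (r.1 - q.1) =
        pvCross t q p * (r.1 - u.1) + pvCross t r p * (u.1 - q.1)
          + pvCross q u r * (p.1 - t.1) := by
      simp [pvCross]; ring
    nlinarith
  · have hqu : q.1 = u.1 := by omega
    have hyqu : q.2 < u.2 := by rw [ltp_iff] at h2; omega
    have key : pvCross t u p = pvCross t q p - (u.2 - q.2) * (p.1 - t.1) := by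
      simp [pvCross, hqu]; ring
    nlinarith
-- strictly convex consecutive triples along a list
def Convex3 : List (Int × Int) → Prop
  | a :: b :: c :: t => 0 < pvCross a b c ∧ Convex3 (b :: c :: t)
  | _ => True

theorem convex3_tail {x : Int × Int} {t : List (Int × Int)} (h : Convex3 (x :: t)) :
    Convex3 t := by
  match t with
  | [] => trivial
  | [a] => trivial
  | a :: b :: t' => exact h.2

-- dropping the SECOND element of a sorted convex chain keeps it convex
theorem convex3_drop2 {x y : Int × Int} {t : List (Int × Int)}
    (hs : (x :: y :: t).Pairwise LtP) (hc : Convex3 (x :: y :: t)) : Convex3 (x :: t) := by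
  match t with
  | [] => trivial
  | [z] => trivial
  | z :: w :: t' =>
    refine ⟨?_, (convex3_tail hc).2⟩
    have h1 : 0 < pvCross x y z := hc.1
    have h2 : 0 < pvCross y z w := hc.2.1
    have hxy : LtP x y := (List.pairwise_cons.1 hs).1 y (by simp)
    have hyz : LtP y z := (List.pairwise_cons.1 (List.pairwise_cons.1 hs).2).1 z (by simp)
    have hzw : LtP z w := by
      have := (List.pairwise_cons.1 (List.pairwise_cons.1 hs).2).2
      exact (List.pairwise_cons.1 this).1 w (by simp)
    exact (lemT hxy hyz hzw h1 h2).2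

theorem convex3_drop3 {x y z : Int × Int} {t : List (Int × Int)}
    (hs : (x :: y :: z :: t).Pairwise LtP) (hc : Convex3 (x :: y :: z :: t)) :
    Convex3 (x :: y :: t) := by
  match t with
  | [] => trivial
  | w :: t' =>
    have hxy : LtP x y := (List.pairwise_cons.1 hs).1 y (by simp)
    have hyz : LtP y z := (List.pairwise_cons.1 (List.pairwise_cons.1 hs).2).1 z (by simp)
    have hzw : LtP z w :=
      (List.pairwise_cons.1 (List.pairwise_cons.1 (List.pairwise_cons.1 hs).2).2).1 w (by simp)
    exact ⟨(lemT hxy hyz hzw hc.1 hc.2.1).1, convex3_drop2 (List.Pairwise.sublist (by simp) hs) hc.2⟩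

theorem chain_head_pairs {x y : Int × Int} :
    ∀ t : List (Int × Int), (x :: y :: t).Pairwise LtP → Convex3 (x :: y :: t) →
      ∀ c ∈ t, 0 < pvCross x y c := by
  intro t
  induction t with
  | nil => intro _ _ c hc; simp at hc
  | cons z t'' ih =>
    intro hs hc c hmem
    rcases List.mem_cons.1 hmem with rfl | hmem'
    · exact hc.1
    · exact ih (List.Pairwise.sublist (by simp) hs) (convex3_drop3 hs hc) c hmem'

theorem chain_head_triples {x : Int × Int} :
    ∀ t : List (Int × Int), (x :: t).Pairwise LtP → Convex3 (x :: t) →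
      ∀ b c, [b, c].Sublist t → 0 < pvCross x b c := by
  intro t
  induction t with
  | nil => intro _ _ b c h; simp at h
  | cons y t' ih =>
    intro hs hc b c hsub
    rcases List.sublist_cons_iff.1 hsub with h | ⟨r, hr, hrs⟩
    · exact ih (List.Pairwise.sublist (by simp) hs) (convex3_drop2 hs hc) b c h
    · cases hr
      exact chain_head_pairs t' hs hc c (List.singleton_sublist.1 hrs)

theorem allTriples :
    ∀ l : List (Int × Int), l.Pairwise LtP → Convex3 l →
      ∀ a b c, [a, b, c].Sublist l → 0 < pvCross a b c := by
  intro l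
  induction l with
  | nil => intro _ _ a b c h; simp at h
  | cons x t ih =>
    intro hs hc a b c hsub
    rcases List.sublist_cons_iff.1 hsub with h | ⟨r, hr, hrs⟩
    · exact ih (List.pairwise_cons.1 hs).2 (convex3_tail hc) a b c h
    · cases hr
      exact chain_head_triples t hs hc b c hrs

theorem pair_sublist :
    ∀ l : List (Int × Int), l.Pairwise LtP → ∀ u q, u ∈ l → q ∈ l → LtP u q →
      [u, q].Sublist l := by
  intro l
  induction l with
  | nil => intro _ u q h; simp at h
  | cons x t ih =>
    intro hs u q hu hq hlt
    rcases List.mem_cons.1 hu with rfl | hu'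
    · have hq' : q ∈ t := by
        rcases List.mem_cons.1 hq with rfl | h
        · exact absurd hlt ltp_irrefl
        · exact h
      exact List.cons_sublist_cons.2 (List.singleton_sublist.2 hq')
    · have hq' : q ∈ t := by
        rcases List.mem_cons.1 hq with rfl | h
        · exact absurd (ltp_trans ((List.pairwise_cons.1 hs).1 u hu') hlt) ltp_irrefl
        · exact h
      exact ((ih (List.pairwise_cons.1 hs).2 u q hu' hq' hlt).cons x)

theorem concat2_of_two_le : ∀ (l : List (Int × Int)), 2 ≤ l.length → ∃ l₀ a b, l = l₀ ++ [a, b]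
  | [], h => by simp at h
  | [x], h => by simp at h
  | [x, y], _ => ⟨[], x, y, rfl⟩
  | x :: y :: z :: t, _ => by
      obtain ⟨l₀, a, b, hab⟩ := concat2_of_two_le (y :: z :: t) (by simp)
      exact ⟨x :: l₀, a, b, by simp [hab]⟩

theorem pyGet_m2 (l₀ : List (Int × Int)) (a b : Int × Int) :
    PySem.List.pyGetD (l₀ ++ [a, b]) (-2) (0, 0) = a := by
  rw [PySem.List.pyGetD_neg_ofNat _ 2 _ (by omega) (by simp)]
  simp

theorem pyGet_m1 (l₀ : List (Int × Int)) (a b : Int × Int) :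
    PySem.List.pyGetD (l₀ ++ [a, b]) (-1) (0, 0) = b := by
  have h : l₀ ++ [a, b] = (l₀ ++ [a]) ++ [b] := by simp
  rw [h, PySem.List.pyGetD_neg_one_append_singleton]

theorem dropLast_concat2 (l₀ : List (Int × Int)) (a b : Int × Int) :
    (l₀ ++ [a, b]).dropLast = l₀ ++ [a] := by
  have h : l₀ ++ [a, b] = (l₀ ++ [a]) ++ [b] := by simp
  rw [h, List.dropLast_concat]

theorem pvPop_prefix (st : List (Int × Int)) (p : Int × Int) :
    (pvPop st p).IsPrefix st := by
  fun_induction pvPop st p with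
  | case1 st hc ih => exact ih.trans (List.dropLast_prefix st)
  | case2 st hc => exact List.prefix_refl st

theorem pvPop_sublist (st : List (Int × Int)) (p : Int × Int) :
    (pvPop st p).Sublist st := (pvPop_prefix st p).sublist

theorem pvPop_ne_nil {st : List (Int × Int)} (p : Int × Int) (h : st ≠ []) :
    pvPop st p ≠ [] := by
  fun_induction pvPop st p with
  | case1 st hc ih =>
    refine ih ?_
    intro hnil
    have h2 := hc.1
    have h3 := congrArg List.length hnil
    simp [List.length_dropLast] at h3
    omega
  | case2 st hc => exact h

theorem pvPop_head? {st : List (Int × Int)} (p : Int × Int) (h : st ≠ []) :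
    (pvPop st p).head? = st.head? := by
  obtain ⟨t, ht⟩ := pvPop_prefix st p
  have hne := pvPop_ne_nil p h
  have h2 : st.head? = (pvPop st p ++ t).head? := by rw [ht]
  rw [h2]
  cases hp : pvPop st p with
  | nil => exact absurd hp hne
  | cons x r => simp

theorem convex3_short : ∀ {l : List (Int × Int)}, l.length ≤ 2 → Convex3 l
  | [], _ => trivial
  | [_], _ => trivial
  | [_, _], _ => trivial
  | _ :: _ :: _ :: _, h => by simp at h

theorem convex3_take : ∀ (l : List (Int × Int)) (n : Nat), Convex3 l → Convex3 (l.take n)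
  | [], n, _ => convex3_short (by simp)
  | [a], n, _ => convex3_short (by rw [List.length_take]; simp only [List.length_cons, List.length_nil]; omega)
  | [a, b], n, _ => convex3_short (by rw [List.length_take]; simp only [List.length_cons, List.length_nil]; omega)
  | a :: b :: c :: t, n, h => by
      match n with
      | 0 => exact convex3_short (by simp)
      | 1 => exact convex3_short (by simp)
      | 2 => exact convex3_short (by simp)
      | n + 3 =>
        have ht := convex3_take (b :: c :: t) (n + 2) h.2
        simp only [List.take_succ_cons] at ht ⊢
        exact ⟨h.1, ht⟩

theorem convex3_prefix {l l' : List (Int × Int)} (h : Convex3 l) (hp : l'.IsPrefix l) :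
    Convex3 l' := by
  rw [List.prefix_iff_eq_take.1 hp]
  exact convex3_take l l'.length h

theorem convex3_pvPop {st : List (Int × Int)} (p : Int × Int) (h : Convex3 st) :
    Convex3 (pvPop st p) := convex3_prefix h (pvPop_prefix st p)

theorem pvPop_stop {st : List (Int × Int)} {p : Int × Int} :
    ∀ l₀ a b, pvPop st p = l₀ ++ [a, b] → 0 < pvCross a b p := by
  fun_induction pvPop st p with
  | case1 st hc ih => exact ih
  | case2 st hc =>
    intro l₀ a b heq
    subst heq
    rw [pyGet_m2, pyGet_m1] at hc
    have h2 : 2 ≤ (l₀ ++ [a, b]).length := by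
      simp only [List.length_append, List.length_cons, List.length_nil]; omega
    have h3 := not_and.1 hc h2
    omega

theorem pop_witness {st : List (Int × Int)} {p : Int × Int} (hs : st.Pairwise LtP) :
    ∀ q ∈ st, q ∉ pvPop st p → ∃ u ∈ st, LtP u q ∧ pvCross u q p ≤ 0 := by
  fun_induction pvPop st p with
  | case1 st hc ih =>
    intro q hq hnq
    obtain ⟨l₀, a, b, rfl⟩ := concat2_of_two_le st hc.1
    rw [dropLast_concat2] at ih hnq
    have hsd : (l₀ ++ [a]).Pairwise LtP := hs.sublist (by simp)
    by_cases hq' : q ∈ l₀ ++ [a]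
    · obtain ⟨u, hu, hlt, he⟩ := ih hsd q hq' hnq
      refine ⟨u, ?_, hlt, he⟩
      revert hu; simp; tauto
    · have hqb : q = b := by revert hq hq'; simp; tauto
      subst hqb
      rw [pyGet_m2, pyGet_m1] at hc
      refine ⟨a, by simp, ?_, hc.2⟩
      have h2 := (List.pairwise_append.1 hs).2.1
      exact (List.pairwise_cons.1 h2).1 q (by simp)
  | case2 st hc =>
    intro q hq hnq
    exact absurd hq hnq

theorem nodup_of_pairwise_ltp {l : List (Int × Int)} (h : l.Pairwise LtP) : l.Nodup :=
  h.imp (fun hab => by rintro rfl; exact ltp_irrefl hab)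

theorem prefix_mem_getLast {R l : List (Int × Int)} (hpre : R.IsPrefix l) (hnd : l.Nodup)
    (h : l ≠ []) (hmem : l.getLast h ∈ R) : R = l := by
  obtain ⟨t, rfl⟩ := hpre
  cases ht : t with
  | nil => simp [ht]
  | cons x r =>
    exfalso
    have h1 : (R ++ t).getLast h ∈ t := by
      have h2 : (R ++ t).getLast? = t.getLast? := List.getLast?_append_of_ne_nil R (by simp [ht])
      rw [List.getLast?_eq_getLast h] at h2
      have h3 : t ≠ [] := by simp [ht]
      rw [List.getLast?_eq_getLast h3] at h2
      have h4 := Option.some_injective _ h2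
      rw [h4]
      exact List.getLast_mem h3
    exact (List.disjoint_of_nodup_append hnd) hmem h1

theorem convex3_append_snoc {p : Int × Int} :
    ∀ (l : List (Int × Int)), Convex3 l →
      (∀ l₀ a b, l = l₀ ++ [a, b] → 0 < pvCross a b p) → Convex3 (l ++ [p])
  | [], _, _ => trivial
  | [a], _, _ => trivial
  | [a, b], _, h2 => ⟨h2 [] a b rfl, trivial⟩
  | a :: b :: c :: t, h, h2 => by
      refine ⟨h.1, ?_⟩
      have := convex3_append_snoc (b :: c :: t) h.2
        (fun l₀ x y hxy => h2 (a :: l₀) x y (by simp [hxy]))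
      simpa using this

-- a,b occur at consecutive positions of C
def Adj (C : List (Int × Int)) (a b : Int × Int) : Prop :=
  ∃ i : Nat, C[i]? = some a ∧ C[i + 1]? = some b

theorem adj_mem {C : List (Int × Int)} {a b : Int × Int} (h : Adj C a b) : a ∈ C ∧ b ∈ C := by
  obtain ⟨i, h1, h2⟩ := h
  obtain ⟨hi, rfl⟩ := List.getElem?_eq_some_iff.1 h1
  obtain ⟨hj, rfl⟩ := List.getElem?_eq_some_iff.1 h2
  exact ⟨List.getElem_mem _, List.getElem_mem _⟩

theorem adj_ltp {C : List (Int × Int)} {a b : Int × Int} (hs : C.Pairwise LtP)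
    (h : Adj C a b) : LtP a b := by
  obtain ⟨i, h1, h2⟩ := h
  obtain ⟨hi, rfl⟩ := List.getElem?_eq_some_iff.1 h1
  obtain ⟨hj, rfl⟩ := List.getElem?_eq_some_iff.1 h2
  exact List.pairwise_iff_getElem.1 hs i (i + 1) hi hj (by omega)

theorem adj_not_between {C : List (Int × Int)} {a b q : Int × Int} (hs : C.Pairwise LtP)
    (h : Adj C a b) (hq : q ∈ C) (hlt : LtP a q) : b = q ∨ LtP b q := by
  obtain ⟨i, h1, h2⟩ := h
  obtain ⟨hi, ha⟩ := List.getElem?_eq_some_iff.1 h1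
  obtain ⟨hj, hb⟩ := List.getElem?_eq_some_iff.1 h2
  obtain ⟨k, hk, hqk⟩ := List.getElem_of_mem hq
  have hik : i < k := by
    by_contra hle
    rcases Nat.lt_or_ge k i with hki | hki
    · exact ltp_asymm hlt (ha ▸ hqk ▸ List.pairwise_iff_getElem.1 hs k i hk hi hki)
    · have : k = i := by omega
      subst this
      exact ltp_irrefl (hqk ▸ ha ▸ hlt)
  rcases Nat.lt_or_ge (i + 1) k with hk1 | hk1
  · exact Or.inr (hb ▸ hqk ▸ List.pairwise_iff_getElem.1 hs (i + 1) k hj hk hk1)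
  · have : k = i + 1 := by omega
    subst this
    exact Or.inl (hb.symm.trans hqk)

theorem adj_prefix {C' C : List (Int × Int)} {a b : Int × Int} (hnd : C.Nodup)
    (hpre : C'.IsPrefix C) (h : Adj C a b) (hb : b ∈ C') : Adj C' a b := by
  obtain ⟨i, h1, h2⟩ := h
  obtain ⟨hj, hbeq⟩ := List.getElem?_eq_some_iff.1 h2
  obtain ⟨t, rfl⟩ := hpre
  obtain ⟨k, hk, hqk⟩ := List.getElem_of_mem hb
  have hk2 : k < (C' ++ t).length := by simp; omega
  have hkC : (C' ++ t)[k]'hk2 = b := by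
    rw [List.getElem_append_left hk]; exact hqk
  have hki : k = i + 1 := by
    have h5 : (C' ++ t)[k]'hk2 = (C' ++ t)[i + 1]'hj := by rw [hkC, hbeq]
    exact (hnd.getElem_inj_iff).1 h5
  subst hki
  refine ⟨i, ?_, ?_⟩
  · rw [List.getElem?_append_left (by omega)] at h1
    exact h1
  · exact List.getElem?_eq_some_iff.2 ⟨by omega, hqk⟩

theorem adj_extend {C' l : List (Int × Int)} {a b : Int × Int} (h : Adj C' a b) :
    Adj (C' ++ l) a b := by
  obtain ⟨i, h1, h2⟩ := h
  have hj : i + 1 < C'.length := (List.getElem?_eq_some_iff.1 h2).1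
  exact ⟨i, by rw [List.getElem?_append_left (by omega)]; exact h1,
    by rw [List.getElem?_append_left (by omega)]; exact h2⟩

theorem adj_last {C' : List (Int × Int)} (p : Int × Int) (h : C' ≠ []) :
    Adj (C' ++ [p]) (C'.getLast h) p := by
  have hlen : 1 ≤ C'.length := by
    cases C' with | nil => simp at h | cons x r => simp
  refine ⟨C'.length - 1, ?_, ?_⟩
  · rw [List.getElem?_append_left (by omega), List.getElem?_eq_some_iff]
    exact ⟨by omega, (List.getLast_eq_getElem h).symm⟩
  · rw [(by omega : C'.length - 1 + 1 = C'.length), List.getElem?_append_right (by omega)]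
    simp

theorem pop_removed {st : List (Int × Int)} {p : Int × Int} (hs : st.Pairwise LtP)
    (hAT : ∀ a b c, [a, b, c].Sublist st → 0 < pvCross a b c) :
    ∀ u ∈ st, u ∉ pvPop st p →
      pvCross ((pvPop st p).getLastD (0, 0)) u p ≤ 0 := by
  fun_induction pvPop st p with
  | case1 st hc ih =>
    intro u hu hnu
    obtain ⟨l₀, a, b, rfl⟩ := concat2_of_two_le st hc.1
    rw [dropLast_concat2] at ih hnu ⊢
    have hsd : (l₀ ++ [a]).Pairwise LtP := hs.sublist (by simp)
    have hATd : ∀ x y z, [x, y, z].Sublist (l₀ ++ [a]) → 0 < pvCross x y z :=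
      fun x y z hxyz => hAT x y z (hxyz.trans (by simp))
    by_cases hu' : u ∈ l₀ ++ [a]
    · exact ih hsd hATd u hu' hnu
    · have hub : u = b := by revert hu hu'; simp; tauto
      subst hub
      rw [pyGet_m2, pyGet_m1] at hc
      set R := pvPop (l₀ ++ [a]) p with hR
      have hne : R ≠ [] := pvPop_ne_nil p (by simp)
      have hteq : R.getLastD (0, 0) = R.getLast hne := by
        rw [List.getLastD_eq_getLast?, List.getLast?_eq_some_getLast hne]; rfl
      by_cases ha : a ∈ R
      · have hRa : R = l₀ ++ [a] := by
          refine prefix_mem_getLast (pvPop_prefix _ _) (nodup_of_pairwise_ltp hsd) (by simp) ?_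
          have hga : (l₀ ++ [a]).getLast (by simp) = a := by
            simp [List.getLast_append]
          rwa [hga]
        rw [hRa, List.getLastD_concat]
        exact hc.2
      · have h1 : pvCross (R.getLastD (0, 0)) a p ≤ 0 := ih hsd hATd a (by simp) ha
        have htmem : R.getLastD (0, 0) ∈ R := by rw [hteq]; exact List.getLast_mem hne
        have h2 : 0 < pvCross (R.getLastD (0, 0)) a u := by
          refine hAT _ a u ?_
          have htl : R.getLastD (0, 0) ∈ l₀ := by
            have hmem2 : R.getLastD (0, 0) ∈ l₀ ++ [a] := (pvPop_sublist _ _).mem htmem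
            rcases List.mem_append.1 hmem2 with h | h
            · exact h
            · rw [List.mem_singleton] at h; exact absurd (h ▸ htmem) ha
          have hsub : ([R.getLastD (0, 0)] ++ [a, u]).Sublist (l₀ ++ [a, u]) :=
            (List.singleton_sublist.2 htl).append (List.Sublist.refl _)
          exact hsub
        have hq := cross_quad (R.getLastD (0, 0)) a u p
        omega
  | case2 st hc =>
    intro u hu hnu
    exact absurd hu hnu

def IsL (P : List (Int × Int)) (q : Int × Int) : Prop :=
  ∀ u ∈ P, ∀ w ∈ P, LtP u q → LtP q w → 0 < pvCross u q w

def IsU (P : List (Int × Int)) (q : Int × Int) : Prop :=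
  ∀ u ∈ P, ∀ w ∈ P, LtP u q → LtP q w → pvCross u q w < 0

def ChainInv (P C : List (Int × Int)) : Prop :=
  C.Sublist P ∧ C.head? = P.head? ∧ C.getLast? = P.getLast? ∧ Convex3 C ∧
  (∀ q ∈ C, IsL P q) ∧
  (∀ u ∈ P, u ∉ C → ∃ a b, Adj C a b ∧ LtP a u ∧ LtP u b ∧ pvCross a u b ≤ 0)

theorem triple_sublist :
    ∀ l : List (Int × Int), l.Pairwise LtP → ∀ a b c, a ∈ l → b ∈ l → c ∈ l →
      LtP a b → LtP b c → [a, b, c].Sublist l := by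
  intro l
  induction l with
  | nil => intro _ a b c h; simp at h
  | cons x t ih =>
    intro hs a b c ha hb hc hab hbc
    have hhead : ∀ y ∈ t, LtP x y := (List.pairwise_cons.1 hs).1
    rcases List.mem_cons.1 ha with rfl | ha'
    · have hb' : b ∈ t := by
        rcases List.mem_cons.1 hb with rfl | h
        · exact absurd hab ltp_irrefl
        · exact h
      have hc' : c ∈ t := by
        rcases List.mem_cons.1 hc with rfl | h
        · exact absurd (ltp_trans hab hbc) ltp_irrefl
        · exact h
      exact List.cons_sublist_cons.2
        (pair_sublist t (List.pairwise_cons.1 hs).2 b c hb' hc' hbc)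
    · have hb' : b ∈ t := by
        rcases List.mem_cons.1 hb with rfl | h
        · exact absurd (hhead a ha') (fun h2 => ltp_asymm h2 hab)
        · exact h
      have hc' : c ∈ t := by
        rcases List.mem_cons.1 hc with rfl | h
        · exact absurd (hhead a ha') (fun h2 => ltp_asymm h2 (ltp_trans hab hbc))
        · exact h
      exact (ih (List.pairwise_cons.1 hs).2 a b c ha' hb' hc' hab hbc).cons x

theorem getLast_max {l : List (Int × Int)} (hs : l.Pairwise LtP) (h : l ≠ [])
    {x : Int × Int} (hx : x ∈ l) : x = l.getLast h ∨ LtP x (l.getLast h) := by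
  obtain ⟨k, hk, hkx⟩ := List.getElem_of_mem hx
  rw [List.getLast_eq_getElem h]
  rcases Nat.lt_or_ge k (l.length - 1) with hlt | hge
  · exact Or.inr (hkx ▸ List.pairwise_iff_getElem.1 hs k (l.length - 1) hk (by omega) hlt)
  · have : k = l.length - 1 := by omega
    subst this
    exact Or.inl hkx.symm

theorem inv_step {P C : List (Int × Int)} {p : Int × Int}
    (hs : (P ++ [p]).Pairwise LtP) (h : ChainInv P C) : ChainInv (P ++ [p]) (pvPop C p ++ [p]) := by
  obtain ⟨hsub, hhead, hlast, hconv, hI1, hI2⟩ := h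
  have hsP : P.Pairwise LtP := hs.sublist (by simp)
  have hltp : ∀ x ∈ P, LtP x p := fun x hx =>
    (List.pairwise_append.1 hs).2.2 x hx p (by simp)
  have hsC : C.Pairwise LtP := hsP.sublist hsub
  have hndC : C.Nodup := nodup_of_pairwise_ltp hsC
  have hpre : (pvPop C p).IsPrefix C := pvPop_prefix C p
  have hC'sub : (pvPop C p).Sublist C := hpre.sublist
  have hsC' : (pvPop C p).Pairwise LtP := hsC.sublist hC'sub
  have hATC : ∀ a b c, [a, b, c].Sublist C → 0 < pvCross a b c := allTriples C hsC hconv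
  have hmemP : ∀ x ∈ pvPop C p, x ∈ P := fun x hx => hsub.mem (hC'sub.mem hx)
  have hsC'p : (pvPop C p ++ [p]).Pairwise LtP := by
    rw [List.pairwise_append]
    exact ⟨hsC', List.pairwise_singleton _ _,
      fun x hx y hy => by simp at hy; exact hy ▸ hltp x (hmemP x hx)⟩
  have hconv' : Convex3 (pvPop C p ++ [p]) :=
    convex3_append_snoc _ (convex3_pvPop p hconv) (fun l₀ a b heq => pvPop_stop l₀ a b heq)
  have hATC'p : ∀ a b c, [a, b, c].Sublist (pvPop C p ++ [p]) → 0 < pvCross a b c :=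
    allTriples _ hsC'p hconv'
  obtain ⟨D, hCD⟩ := pvPop_prefix C p
  have hC'D : ∀ x ∈ pvPop C p, ∀ y ∈ D, LtP x y := by
    have := List.pairwise_append.1 (hCD ▸ hsC)
    exact this.2.2
  have hDmem : ∀ y ∈ D, y ∈ C := fun y hy => by rw [← hCD]; simp [hy]
  refine ⟨?_, ?_, ?_, hconv', ?_, ?_⟩
  · exact (hC'sub.trans hsub).append (List.Sublist.refl _)
  · -- head?
    cases hP : P with
    | nil =>
      have hC : C = [] := by
        rw [hP] at hsub; exact List.sublist_nil.1 hsub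
      simp [hC, hP, pvPop]
    | cons x r =>
      have hCne : C ≠ [] := by
        intro hC
        rw [hC] at hhead; rw [hP] at hhead; simp at hhead
      have hC'ne := pvPop_ne_nil p hCne
      rw [← hP]
      have h1 : (pvPop C p ++ [p]).head? = (pvPop C p).head? := by
        cases hcc : pvPop C p with
        | nil => exact absurd hcc hC'ne
        | cons z w => simp
      have h2 : (P ++ [p]).head? = P.head? := by
        rw [hP]; simp
      rw [h1, h2, pvPop_head? p hCne, hhead]
  · simp
  · -- Inv1
    intro q hq
    intro u hu w hw hluq hlqw
    rcases List.mem_append.1 hq with hqC' | hqp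
    · have hqC : q ∈ C := hC'sub.mem hqC'
      have hqP : q ∈ P := hsub.mem hqC
      rcases List.mem_append.1 hw with hwP | hwp
      · rcases List.mem_append.1 hu with huP | hup
        · exact hI1 q hqC u huP w hwP hluq hlqw
        · simp at hup
          exact absurd (ltp_trans (hup ▸ hluq) (hltp q hqP)) ltp_irrefl
      · simp at hwp
        rw [hwp] at hlqw ⊢
        have huP : u ∈ P := by
          rcases List.mem_append.1 hu with h1 | h1
          · exact h1
          · simp at h1
            exact absurd (ltp_trans (h1 ▸ hluq) (hltp q hqP)) ltp_irrefl
        by_cases huC' : u ∈ pvPop C p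
        · refine hATC'p u q p ?_
          have hp2 : ([u, q] ++ [p]).Sublist (pvPop C p ++ [p]) :=
            (pair_sublist _ hsC' u q huC' hqC' hluq).append (List.Sublist.refl _)
          exact hp2
        · by_cases huC : u ∈ C
          · have huD : u ∈ D := by
              rw [← hCD] at huC
              rcases List.mem_append.1 huC with h1 | h1
              · exact absurd h1 huC'
              · exact h1
            exact absurd (hC'D q hqC' u huD) (fun h2 => ltp_asymm h2 hluq)
          · obtain ⟨a, b, hadj, hau, hub, he⟩ := hI2 u huP huC
            have haq : LtP a q := ltp_trans hau hluq
            have hbC : b ∈ C := (adj_mem hadj).2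
            have haC : a ∈ C := (adj_mem hadj).1
            rcases adj_not_between hsC hadj hqC haq with hbq | hbq
            · subst hbq
              have heqp : 0 < pvCross a b p := by
                refine hATC'p a b p ?_
                have haC2 : a ∈ pvPop C p := by
                  rw [← hCD] at haC
                  rcases List.mem_append.1 haC with h1 | h1
                  · exact h1
                  · exact absurd (hC'D b hqC' a h1) (fun h2 => ltp_asymm h2 haq)
                have hp2 : ([a, b] ++ [p]).Sublist (pvPop C p ++ [p]) :=
                  (pair_sublist _ hsC' a b haC2 hqC' haq).append (List.Sublist.refl _)
                exact hp2
              exact lemT2 hau hluq (hltp b hqP) he heqp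
            · -- LtP b q
              have hbC' : b ∈ pvPop C p := by
                rw [← hCD] at hbC
                rcases List.mem_append.1 hbC with h1 | h1
                · exact h1
                · exact absurd (hC'D q hqC' b h1) (fun h2 => ltp_asymm h2 hbq)
              have heabq : 0 < pvCross a b q :=
                hATC a b q (triple_sublist C hsC a b q haC hbC hqC (adj_ltp hsC hadj) hbq)
              have heubq : 0 < pvCross u b q := lemT2 hau hub hbq he heabq
              have hebqp : 0 < pvCross b q p := by
                refine hATC'p b q p ?_
                have hp2 : ([b, q] ++ [p]).Sublist (pvPop C p ++ [p]) :=
                  (pair_sublist _ hsC' b q hbC' hqC' hbq).append (List.Sublist.refl _)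
                exact hp2
              exact (lemT hub hbq (hltp q hqP) heubq hebqp).2
    · simp at hqp
      exfalso
      rw [hqp] at hluq hlqw
      rcases List.mem_append.1 hw with hwP | hwp
      · exact ltp_asymm hlqw (hltp w hwP)
      · simp at hwp
        rw [hwp] at hlqw
        exact ltp_irrefl hlqw
  · -- Inv2
    intro u hu hnu
    have huP : u ∈ P := by
      rcases List.mem_append.1 hu with h1 | h1
      · exact h1
      · exfalso; simp at h1; rw [h1] at hnu; exact hnu (by simp)
    have hunotC' : u ∉ pvPop C p := fun h1 => hnu (List.mem_append.2 (Or.inl h1))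
    have hCne : C ≠ [] := by
      intro hC
      rw [hC] at hhead
      cases hP : P with
      | nil => rw [hP] at huP; simp at huP
      | cons x r => rw [hP] at hhead; simp at hhead
    have hC'ne := pvPop_ne_nil (st := C) p hCne
    have hteq : (pvPop C p).getLastD (0, 0) = (pvPop C p).getLast hC'ne := by
      rw [List.getLastD_eq_getLast?, List.getLast?_eq_some_getLast hC'ne]; rfl
    have htC' : (pvPop C p).getLast hC'ne ∈ pvPop C p := List.getLast_mem hC'ne
    have hadj_tp : Adj (pvPop C p ++ [p]) ((pvPop C p).getLast hC'ne) p := adj_last p hC'ne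
    have hltup : LtP u p := hltp u huP
    by_cases huC : u ∈ C
    · -- u was popped just now
      have hlt_tu : LtP ((pvPop C p).getLast hC'ne) u := by
        have huD : u ∈ D := by
          rw [← hCD] at huC
          rcases List.mem_append.1 huC with h1 | h1
          · exact absurd h1 hunotC'
          · exact h1
        exact hC'D _ htC' u huD
      have hetup : pvCross ((pvPop C p).getLast hC'ne) u p ≤ 0 := by
        rw [← hteq]
        exact pop_removed hsC hATC u huC hunotC'
      exact ⟨_, p, hadj_tp, hlt_tu, hltup, hetup⟩
    · obtain ⟨a, b, hadj, hau, hub, he⟩ := hI2 u huP huC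
      have hbC : b ∈ C := (adj_mem hadj).2
      have haC : a ∈ C := (adj_mem hadj).1
      by_cases hbC' : b ∈ pvPop C p
      · exact ⟨a, b, adj_extend (adj_prefix hndC hpre hadj hbC'), hau, hub, he⟩
      · have hbD : b ∈ D := by
          rw [← hCD] at hbC
          rcases List.mem_append.1 hbC with h1 | h1
          · exact absurd h1 hbC'
          · exact h1
        have hetbp : pvCross ((pvPop C p).getLast hC'ne) b p ≤ 0 := by
          rw [← hteq]; exact pop_removed hsC hATC b hbC hbC'
        have hltbp : LtP b p := hltp b (hsub.mem hbC)
        by_cases haC' : a ∈ pvPop C p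
        · -- a must be the new top
          have hat : a = (pvPop C p).getLast hC'ne := by
            rcases getLast_max hsC' hC'ne haC' with h1 | h1
            · exact h1
            · exfalso
              have htC : (pvPop C p).getLast hC'ne ∈ C := hC'sub.mem htC'
              rcases adj_not_between hsC hadj htC h1 with h2 | h2
              · exact hbC' (h2 ▸ htC')
              · exact ltp_asymm h2 (hC'D _ htC' b hbD)
          subst hat
          exact ⟨_, p, hadj_tp, hau, hltup,
            lemP2 hau hub hltbp he hetbp⟩
        · -- a popped too
          have haD : a ∈ D := by
            rw [← hCD] at haC
            rcases List.mem_append.1 haC with h1 | h1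
            · exact absurd h1 haC'
            · exact h1
          have hetap : pvCross ((pvPop C p).getLast hC'ne) a p ≤ 0 := by
            rw [← hteq]; exact pop_removed hsC hATC a haC haC'
          have hlt_ta : LtP ((pvPop C p).getLast hC'ne) a := hC'D _ htC' a haD
          exact ⟨_, p, hadj_tp, ltp_trans hlt_ta hau, hltup,
            lemP3 hlt_ta hau hub hltbp he hetap hetbp⟩

theorem inv_LH (P : List (Int × Int)) (hs : P.Pairwise LtP) :
    ChainInv P (P.foldl (fun st p => pvPop st p ++ [p]) []) := by
  induction P using List.reverseRecOn with
  | nil => exact ⟨by simp, rfl, rfl, trivial, by simp, by simp⟩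
  | append_singleton P p ih =>
    rw [List.foldl_append]
    exact inv_step hs (ih (hs.sublist (by simp)))

theorem mem_LH_iff {P : List (Int × Int)} (hs : P.Pairwise LtP) (q : Int × Int) :
    q ∈ P.foldl (fun st p => pvPop st p ++ [p]) [] ↔ q ∈ P ∧ IsL P q := by
  obtain ⟨hsub, _, _, _, hI1, hI2⟩ := inv_LH P hs
  constructor
  · intro hq
    exact ⟨hsub.mem hq, hI1 q hq⟩
  · rintro ⟨hqP, hIsL⟩
    by_contra hq
    obtain ⟨a, b, hadj, hau, hub, he⟩ := hI2 q hqP hq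
    have haP : a ∈ P := hsub.mem (adj_mem hadj).1
    have hbP : b ∈ P := hsub.mem (adj_mem hadj).2
    exact absurd (hIsL a haP b hbP hau hub) (by omega)

def pvNeg (p : Int × Int) : Int × Int := (-p.1, -p.2)

theorem pyGetD_neg_map (st : List (Int × Int)) (i : Int) :
    PySem.List.pyGetD (st.map pvNeg) i (0, 0) = pvNeg (PySem.List.pyGetD st i (0, 0)) := by
  have h : ((0, 0) : Int × Int) = pvNeg (0, 0) := by simp [pvNeg]
  conv_lhs => rw [h]
  rw [PySem.List.pyGetD_map]

theorem cross_neg (o a b : Int × Int) :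
    pvCross (pvNeg o) (pvNeg a) (pvNeg b) = pvCross o a b := by
  simp [pvCross, pvNeg]; ring

theorem pvPop_neg (st : List (Int × Int)) (p : Int × Int) :
    pvPop (st.map pvNeg) (pvNeg p) = (pvPop st p).map pvNeg := by
  fun_induction pvPop st p with
  | case1 st hc ih =>
    rw [pvPop]
    simp only [List.length_map, pyGetD_neg_map, cross_neg, if_pos hc, ← List.map_dropLast, ih]
  | case2 st hc =>
    rw [pvPop]
    simp only [List.length_map, pyGetD_neg_map, cross_neg, if_neg hc]

theorem chainFold_neg (l st : List (Int × Int)) :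
    (l.map pvNeg).foldl (fun st p => pvPop st p ++ [p]) (st.map pvNeg)
      = (l.foldl (fun st p => pvPop st p ++ [p]) st).map pvNeg := by
  induction l generalizing st with
  | nil => rfl
  | cons x xs ih =>
    simp only [List.map_cons, List.foldl_cons, pvPop_neg]
    rw [show List.map pvNeg (pvPop st x) ++ [pvNeg x] = List.map pvNeg (pvPop st x ++ [x]) by simp]
    exact ih (pvPop st x ++ [x])

theorem chainFold_neg0 (l : List (Int × Int)) :
    (l.map pvNeg).foldl (fun st p => pvPop st p ++ [p]) []
      = (l.foldl (fun st p => pvPop st p ++ [p]) []).map pvNeg :=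
  chainFold_neg l []

theorem neg_neg_map (l : List (Int × Int)) : (l.map pvNeg).map pvNeg = l := by
  simp [List.map_map, Function.comp_def, pvNeg]

theorem ltp_neg {a b : Int × Int} : LtP (pvNeg b) (pvNeg a) ↔ LtP a b := by
  rw [ltp_iff, ltp_iff]; simp [pvNeg]; omega

theorem mem_neg_map {q : Int × Int} {l : List (Int × Int)} :
    q ∈ l.map pvNeg ↔ pvNeg q ∈ l := by
  constructor
  · rintro h
    obtain ⟨x, hx, rfl⟩ := List.mem_map.1 h
    simpa [pvNeg] using hx
  · intro h
    refine List.mem_map.2 ⟨pvNeg q, h, by simp [pvNeg]⟩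

theorem pairwise_neg_rev {P : List (Int × Int)} (hs : P.Pairwise LtP) :
    (P.reverse.map pvNeg).Pairwise LtP := by
  rw [List.pairwise_map, List.pairwise_reverse]
  exact hs.imp (fun h => ltp_neg.2 h)

theorem pvNeg_invol (p : Int × Int) : pvNeg (pvNeg p) = p := by simp [pvNeg]

theorem mem_negrev {q : Int × Int} {P : List (Int × Int)} :
    pvNeg q ∈ P.reverse.map pvNeg ↔ q ∈ P := by
  rw [mem_neg_map, pvNeg_invol, List.mem_reverse]

theorem mem_UH_iff {P : List (Int × Int)} (hs : P.Pairwise LtP) (q : Int × Int) :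
    q ∈ P.reverse.foldl (fun st p => pvPop st p ++ [p]) [] ↔ q ∈ P ∧ IsU P q := by
  have hrev : P.reverse = (P.reverse.map pvNeg).map pvNeg := (neg_neg_map _).symm
  rw [hrev, chainFold_neg0, mem_neg_map,
    mem_LH_iff (pairwise_neg_rev hs) (pvNeg q)]
  constructor
  · rintro ⟨hmem, hL⟩
    refine ⟨mem_negrev.1 hmem, ?_⟩
    intro u hu w hw huq hqw
    have h1 := hL (pvNeg w) (mem_negrev.2 hw) (pvNeg u) (mem_negrev.2 hu)
      (ltp_neg.2 hqw) (ltp_neg.2 huq)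
    rw [cross_neg, cross_swap13] at h1
    omega
  · rintro ⟨hmem, hU⟩
    refine ⟨mem_negrev.2 hmem, ?_⟩
    intro u hu w hw huq hqw
    have hu' : pvNeg u ∈ P := List.mem_reverse.1 (mem_neg_map.1 hu)
    have hw' : pvNeg w ∈ P := List.mem_reverse.1 (mem_neg_map.1 hw)
    have huq' : LtP q (pvNeg u) := by
      rw [show u = pvNeg (pvNeg u) from (pvNeg_invol u).symm] at huq
      exact ltp_neg.1 huq
    have hqw' : LtP (pvNeg w) q := by
      rw [show w = pvNeg (pvNeg w) from (pvNeg_invol w).symm] at hqw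
      exact ltp_neg.1 hqw
    have h1 := hU (pvNeg w) hw' (pvNeg u) hu' hqw' huq'
    have h2 : pvCross u (pvNeg q) w
        = pvCross (pvNeg (pvNeg u)) (pvNeg q) (pvNeg (pvNeg w)) := by
      rw [pvNeg_invol, pvNeg_invol]
    rw [h2, cross_neg] at *
    rw [cross_swap13] at h1
    omega

def pvLowB (P : List (Int × Int)) (q : Int × Int) : Bool :=
  P.all fun a => P.all fun b =>
    if pvPairLt a q && pvPairLt q b then decide (0 < pvCross a q b) else true

def pvUpB (P : List (Int × Int)) (q : Int × Int) : Bool :=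
  P.all fun a => P.all fun b =>
    if pvPairLt a q && pvPairLt q b then decide (pvCross a q b < 0) else true

theorem pvLowB_iff {P : List (Int × Int)} {q : Int × Int} :
    pvLowB P q = true ↔ IsL P q := by
  simp only [pvLowB, List.all_eq_true]
  constructor
  · intro h u hu w hw h1 h2
    have h3 := h u hu w hw
    rw [if_pos (by rw [(h1 : pvPairLt u q = true), (h2 : pvPairLt q w = true)]; rfl)] at h3
    exact of_decide_eq_true h3
  · intro h a ha b hb
    by_cases hc : (pvPairLt a q && pvPairLt q b) = true
    · rw [if_pos hc]
      exact decide_eq_true (h a ha b hb (Bool.and_eq_true_iff.1 hc).1 (Bool.and_eq_true_iff.1 hc).2)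
    · rw [if_neg hc]

theorem pvUpB_iff {P : List (Int × Int)} {q : Int × Int} :
    pvUpB P q = true ↔ IsU P q := by
  simp only [pvUpB, List.all_eq_true]
  constructor
  · intro h u hu w hw h1 h2
    have h3 := h u hu w hw
    rw [if_pos (by rw [(h1 : pvPairLt u q = true), (h2 : pvPairLt q w = true)]; rfl)] at h3
    exact of_decide_eq_true h3
  · intro h a ha b hb
    by_cases hc : (pvPairLt a q && pvPairLt q b) = true
    · rw [if_pos hc]
      exact decide_eq_true (h a ha b hb (Bool.and_eq_true_iff.1 hc).1 (Bool.and_eq_true_iff.1 hc).2)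
    · rw [if_neg hc]

theorem sublist_eq_filter {l P : List (Int × Int)} (f : (Int × Int) → Bool)
    (hsub : l.Sublist P) (hnd : P.Nodup)
    (hmem : ∀ x, x ∈ l ↔ (x ∈ P ∧ f x = true)) : l = P.filter f := by
  induction hsub with
  | slnil => rfl
  | @cons l' P' a hsub ih =>
    have hna : a ∉ P' := (List.nodup_cons.1 hnd).1
    have hfa : f a = false := by
      by_contra hfa
      have : a ∈ l' := (hmem a).2 ⟨by simp, by revert hfa; cases f a <;> simp⟩
      exact hna (hsub.mem this)
    rw [List.filter_cons, if_neg (by simp [hfa])]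
    refine ih (List.nodup_cons.1 hnd).2 (fun x => ?_)
    constructor
    · intro hx
      have h2 := (hmem x).1 hx
      rcases List.mem_cons.1 h2.1 with rfl | h3
      · exact absurd (hsub.mem hx) hna
      · exact ⟨h3, h2.2⟩
    · intro hx
      have := (hmem x).2 ⟨List.mem_cons.2 (Or.inr hx.1), hx.2⟩
      exact this
  | @cons₂ l' P' a hsub ih =>
    have hna : a ∉ P' := (List.nodup_cons.1 hnd).1
    have hfa : f a = true := ((hmem a).1 (by simp)).2
    rw [List.filter_cons, if_pos (by simp [hfa])]
    refine congrArg (a :: ·) (ih (List.nodup_cons.1 hnd).2 (fun x => ?_))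
    constructor
    · intro hx
      have h2 := (hmem x).1 (List.mem_cons.2 (Or.inr hx))
      rcases List.mem_cons.1 h2.1 with rfl | h3
      · exact absurd (hsub.mem hx) hna
      · exact ⟨h3, h2.2⟩
    · intro hx
      have h2 := (hmem x).2 ⟨List.mem_cons.2 (Or.inr hx.1), hx.2⟩
      rcases List.mem_cons.1 h2 with rfl | h3
      · exact absurd hx.1 hna
      · exact h3

theorem LH_filter {P : List (Int × Int)} (hs : P.Pairwise LtP) :
    P.foldl (fun st p => pvPop st p ++ [p]) [] = P.filter (pvLowB P) := by
  refine sublist_eq_filter _ (inv_LH P hs).1 (nodup_of_pairwise_ltp hs) (fun x => ?_)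
  rw [mem_LH_iff hs x, pvLowB_iff]

theorem UH_filter {P : List (Int × Int)} (hs : P.Pairwise LtP) :
    P.reverse.foldl (fun st p => pvPop st p ++ [p]) [] = P.reverse.filter (pvUpB P) := by
  have hsub : (P.reverse.foldl (fun st p => pvPop st p ++ [p]) []).Sublist P.reverse := by
    have h1 : P.reverse = (P.reverse.map pvNeg).map pvNeg := (neg_neg_map _).symm
    rw [h1, chainFold_neg0]
    exact ((inv_LH _ (pairwise_neg_rev hs)).1).map pvNeg
  refine sublist_eq_filter _ hsub (by
    rw [List.nodup_reverse]; exact nodup_of_pairwise_ltp hs) (fun x => ?_)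
  rw [mem_UH_iff hs x, pvUpB_iff, List.mem_reverse]

theorem filter_two_le {l : List (Int × Int)} {f g : (Int × Int) → Bool}
    (hex : ∀ x ∈ l, ¬(f x = true ∧ g x = true)) :
    (l.filter f).length + (l.filter g).length ≤ l.length := by
  induction l with
  | nil => simp
  | cons x t ih =>
    have hex' : ∀ y ∈ t, ¬(f y = true ∧ g y = true) := fun y hy => hex y (by simp [hy])
    have hx := hex x (by simp)
    rw [List.filter_cons, List.filter_cons]
    have ht := ih hex'
    by_cases hf : f x = true
    · have hg : ¬ g x = true := fun h => hx ⟨hf, h⟩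
      simp only [hf, if_pos, if_neg, hg]
      simp
      omega
    · by_cases hg : g x = true
      · simp only [if_neg, hf, hg, if_pos]
        simp [hf, hg]
        omega
      · simp [hf, hg]
        omega

theorem filter_two_eq_iff {l : List (Int × Int)} {f g : (Int × Int) → Bool}
    (hex : ∀ x ∈ l, ¬(f x = true ∧ g x = true)) :
    ((l.filter f).length + (l.filter g).length = l.length)
      ↔ ∀ x ∈ l, f x = true ∨ g x = true := by
  induction l with
  | nil => simp
  | cons x t ih =>
    have hex' : ∀ y ∈ t, ¬(f y = true ∧ g y = true) := fun y hy => hex y (by simp [hy])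
    have hle := filter_two_le hex'
    have hx := hex x (by simp)
    rw [List.filter_cons, List.filter_cons]
    constructor
    · intro h
      by_cases hf : f x = true
      · have hg : ¬ g x = true := fun hh => hx ⟨hf, hh⟩
        simp only [if_pos hf, if_neg hg] at h
        simp only [List.length_cons] at h
        intro y hy
        rcases List.mem_cons.1 hy with rfl | hy'
        · exact Or.inl hf
        · exact (ih hex').1 (by omega) y hy'
      · by_cases hg : g x = true
        · simp only [if_neg hf, if_pos hg] at h
          simp only [List.length_cons] at h
          intro y hy
          rcases List.mem_cons.1 hy with rfl | hy'
          · exact Or.inr hg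
          · exact (ih hex').1 (by omega) y hy'
        · simp only [if_neg hf, if_neg hg] at h
          simp only [List.length_cons] at h
          omega
    · intro h
      have ht := (ih hex').2 (fun y hy => h y (by simp [hy]))
      rcases h x (by simp) with hf | hg
      · have hg : ¬ g x = true := fun hh => hx ⟨hf, hh⟩
        simp only [if_pos hf, if_neg hg]
        simp
        omega
      · have hf : ¬ f x = true := fun hh => hx ⟨hh, hg⟩
        simp only [if_neg hf, if_pos hg]
        simp
        omega

theorem decomp2 : ∀ (l : List (Int × Int)), 2 ≤ l.length → ∃ a m b, l = a :: m ++ [b] := by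
  intro l h
  match l, h with
  | x :: t, h =>
    have ht : t ≠ [] := by
      intro h2; rw [h2] at h; simp at h
    exact ⟨x, t.dropLast, t.getLast ht, by rw [List.cons_append, List.dropLast_append_getLast ht]⟩

theorem sorted2_as_sorted (xs : List (Int × Int)) :
    PySem.List.sorted2 xs Prod.fst Prod.snd
      = PySem.List.sorted xs (fun p => toLex p) := by
  rw [PySem.List.sorted_eq_foldl_insertBy]
  show List.foldl (fun acc x => PySem.List.insertBy _ x acc) [] xs = _
  congr 1
  funext acc x
  congr 1
  funext a b
  have h : (toLex a < toLex b) ↔ (a.1 < b.1 ∨ a.1 = b.1 ∧ a.2 < b.2) := Prod.Lex.lt_iff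
  rw [Bool.eq_iff_iff]
  simp [h]
  omega

theorem ltp_iff_lex {a b : Int × Int} : LtP a b ↔ toLex a < toLex b := by
  rw [ltp_iff, Prod.Lex.lt_iff]
  exact Iff.rfl

theorem sorted2_eq_of_perm {xs ys : List (Int × Int)} (hperm : ys.Perm xs)
    (hp : ys.Pairwise LtP) :
    PySem.List.sorted2 xs Prod.fst Prod.snd = ys := by
  rw [sorted2_as_sorted]
  refine PySem.List.sorted_eq_of_perm_of_pairwise_lt xs ys _ hperm ?_
  exact hp.imp (fun h => ltp_iff_lex.1 h)

theorem sortedset_eq {S : List (Int × Int)} (hs : S.Pairwise LtP) :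
    PySem.List.sorted2 (PySem.Set.ofList S) Prod.fst Prod.snd = S := by
  rw [PySem.Set.ofList_eq_self_of_nodup S (nodup_of_pairwise_ltp hs)]
  exact sorted2_eq_of_perm (List.Perm.refl S) hs

theorem sorted2_perm_congr {xs ys : List (Int × Int)} (hperm : xs.Perm ys) (hnd : xs.Nodup) :
    PySem.List.sorted2 xs Prod.fst Prod.snd = PySem.List.sorted2 ys Prod.fst Prod.snd := by
  have hnd2 : (PySem.List.sorted2 xs Prod.fst Prod.snd).Nodup :=
    ((PySem.List.sorted2_perm xs Prod.fst Prod.snd false).nodup_iff).2 hnd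
  have hpw : (PySem.List.sorted xs (fun p : Int × Int => toLex p)).Pairwise LtP := by
    have h1 := PySem.List.sorted_pairwise (xs := xs) (key := fun p : Int × Int => toLex p)
    have h2 : (PySem.List.sorted xs (fun p : Int × Int => toLex p)).Nodup := by
      rw [← sorted2_as_sorted]; exact hnd2
    refine (h1.and h2).imp (fun {a b} hab => ?_)
    obtain ⟨hle, hne⟩ := hab
    rw [ltp_iff_lex]
    rcases lt_or_eq_of_le hle with h | h
    · exact h
    · exact absurd (congrArg ofLex h) hne
  rw [sorted2_as_sorted, sorted2_as_sorted]
  refine (PySem.List.sorted_eq_of_perm_of_pairwise_lt ys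
    (PySem.List.sorted xs (fun p : Int × Int => toLex p)) _ ?_ ?_).symm
  · exact (PySem.List.sorted_perm xs _ false).trans hperm
  · exact hpw.imp (fun h => ltp_iff_lex.1 h)

theorem min?_perm_int {l₁ l₂ : List Int} (hperm : l₁.Perm l₂) :
    PySem.List.min? l₁ (fun x => x) = PySem.List.min? l₂ (fun x => x) := by
  cases h1 : PySem.List.min? l₁ (fun x : Int => x) with
  | none =>
    rw [PySem.List.min?_eq_none_iff] at h1
    subst h1
    rw [List.nil_perm.1 hperm]
    simp [PySem.List.min?]
  | some m =>
    cases h2 : PySem.List.min? l₂ (fun x : Int => x) with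
    | none =>
      rw [PySem.List.min?_eq_none_iff] at h2
      subst h2
      rw [List.perm_nil.1 hperm] at h1
      exact absurd h1 (by simp [PySem.List.min?])
    | some m' =>
      have hm := PySem.List.min?_mem h1
      have hm' := PySem.List.min?_mem h2
      have hle := PySem.List.min?_isMin h1 m' (hperm.symm.mem_iff.1 hm')
      have hle' := PySem.List.min?_isMin h2 m (hperm.mem_iff.1 hm)
      exact congrArg some (le_antisymm hle hle')

theorem normalize_perm {l₁ l₂ : List (Int × Int)} (hperm : l₁.Perm l₂) (hnd : l₁.Nodup) :
    normalize_polygon l₁ = normalize_polygon l₂ := by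
  unfold normalize_polygon
  by_cases h : l₁ = []
  · subst h
    rw [List.nil_perm.1 hperm]
  · have h2 : l₂ ≠ [] := fun hh => h (List.perm_nil.1 (hh ▸ hperm))
    rw [if_neg h, if_neg h2]
    have hx : PySem.List.min? (l₁.map Prod.fst) (fun x => x)
        = PySem.List.min? (l₂.map Prod.fst) (fun x => x) := min?_perm_int (hperm.map _)
    have hy : PySem.List.min? (l₁.map Prod.snd) (fun x => x)
        = PySem.List.min? (l₂.map Prod.snd) (fun x => x) := min?_perm_int (hperm.map _)
    simp only [hx, hy]
    refine sorted2_perm_congr (hperm.map _) ?_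
    refine (List.nodup_map_iff_inj_on hnd).2 ?_
    intro a _ b _ hab
    simp only [Prod.mk.injEq] at hab
    exact Prod.ext (by omega) (by omega)

theorem rot_perm {a b : List (Int × Int)} (n : Int) (h : a.Perm b) :
    (rotate_90 a n).Perm (rotate_90 b n) := h.map _

theorem refl_perm {a b : List (Int × Int)} (n : Int) (h : a.Perm b) :
    (reflect_h a n).Perm (reflect_h b n) := h.map _

theorem rot_nodup {a : List (Int × Int)} (n : Int) (h : a.Nodup) : (rotate_90 a n).Nodup := by
  refine h.map ?_
  intro p q hpq
  simp only [Prod.mk.injEq] at hpq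
  exact Prod.ext (by omega) (by omega)

theorem refl_nodup {a : List (Int × Int)} (n : Int) (h : a.Nodup) : (reflect_h a n).Nodup := by
  refine h.map ?_
  intro p q hpq
  simp only [Prod.mk.injEq] at hpq
  exact Prod.ext (by omega) (by omega)

theorem canonical_form_perm {l₁ l₂ : List (Int × Int)} (n : Int) (hperm : l₁.Perm l₂)
    (hnd : l₁.Nodup) : canonical_form l₁ n = canonical_form l₂ n := by
  unfold canonical_form
  rw [show PySem.List.pyRange 0 4 1 = [0, 1, 2, 3] from by decide]
  simp only [List.foldl_cons, List.foldl_nil]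
  rw [normalize_perm hperm hnd,
    normalize_perm (refl_perm n hperm) (refl_nodup n hnd),
    normalize_perm (rot_perm n hperm) (rot_nodup n hnd),
    normalize_perm (refl_perm n (rot_perm n hperm)) (refl_nodup n (rot_nodup n hnd)),
    normalize_perm (rot_perm n (rot_perm n hperm)) (rot_nodup n (rot_nodup n hnd)),
    normalize_perm (refl_perm n (rot_perm n (rot_perm n hperm)))
      (refl_nodup n (rot_nodup n (rot_nodup n hnd))),
    normalize_perm (rot_perm n (rot_perm n (rot_perm n hperm)))
      (rot_nodup n (rot_nodup n (rot_nodup n hnd))),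
    normalize_perm (refl_perm n (rot_perm n (rot_perm n (rot_perm n hperm))))
      (refl_nodup n (rot_nodup n (rot_nodup n (rot_nodup n hnd))))]

theorem cyc_eq (pts : List (Int × Int)) :
    pts.zip (pts.tail ++ pts.take 1)
      = (PySem.List.pyRange 0 (pts.length : Int) 1).map
          (fun i => (PySem.List.pyGetD pts i (0, 0),
            PySem.List.pyGetD pts (PySem.Int.mod (i + 1) (pts.length : Int)) (0, 0))) := by
  apply List.ext_getElem
  · simp [PySem.List.length_pyRange_one, List.length_zip, List.length_tail, List.length_take]
    omega
  · intro k hk1 hk2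
    have hlen : k < pts.length := by
      have := hk1; simp [List.length_zip, List.length_tail, List.length_take] at this; omega
    have hr : k < (PySem.List.pyRange 0 (pts.length : Int) 1).length := by
      simpa [PySem.List.length_pyRange_one] using hlen
    rw [List.getElem_map, PySem.List.getElem_pyRange_one _ _ k hr]
    simp only [zero_add]
    have h1 : PySem.List.pyGetD pts ((k : Int)) (0, 0) = pts[k] := by
      rw [PySem.List.pyGetD_natCast]; exact List.getD_eq_getElem _ _ hlen
    have hmod : PySem.Int.mod ((k : Int) + 1) (pts.length : Int)
        = (((k + 1) % pts.length : Nat) : Int) := by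
      rw [show ((k : Int) + 1) = (((k + 1 : Nat)) : Int) by push_cast; ring, PySem.Int.mod_natCast]
    have hlt : (k + 1) % pts.length < pts.length := Nat.mod_lt _ (by omega)
    have h2 : PySem.List.pyGetD pts (PySem.Int.mod ((k : Int) + 1) (pts.length : Int)) (0, 0)
        = pts[(k + 1) % pts.length] := by
      rw [hmod, PySem.List.pyGetD_natCast]; exact List.getD_eq_getElem _ _ hlt
    rw [List.getElem_zip, h1, h2]
    congr 1
    by_cases hk : k + 1 < pts.length
    · have hm : (k + 1) % pts.length = k + 1 := Nat.mod_eq_of_lt hk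
      simp only [hm]
      rw [List.getElem_append_left (by simp [List.length_tail]; omega), List.getElem_tail]
    · have hm : (k + 1) % pts.length = 0 := by
        rw [show k + 1 = pts.length by omega, Nat.mod_self]
      simp only [hm]
      rw [List.getElem_append_right (by simp [List.length_tail]; omega)]
      simp only [List.length_tail]
      rw [List.getElem_take]
      congr 1
      omega

def pvW (p q : Int × Int) : Int := p.1 * q.2 - q.1 * p.2

theorem area_zip (pts : List (Int × Int)) :
    polygon_area_2 pts
      = |((pts.zip (pts.tail ++ pts.take 1)).map (fun pq => pvW pq.1 pq.2)).sum| := by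
  unfold polygon_area_2
  dsimp only
  congr 1
  rw [PySem.List.foldl_add, cyc_eq, List.map_map]
  rw [zero_add]
  rfl

def pairSum (v0 : Int × Int) : List (Int × Int) → Int
  | a :: b :: t => pvCross v0 a b + pairSum v0 (b :: t)
  | _ => 0

theorem SZ_eq : ∀ (l : List (Int × Int)) (x v0 : Int × Int),
    (((x :: l).zip (l ++ [v0])).map (fun pq => pvW pq.1 pq.2)).sum
      = pairSum v0 (x :: l) + pvW x v0 := by
  intro l
  induction l with
  | nil => intro x v0; simp [pairSum]
  | cons a t ih =>
    intro x v0
    simp only [List.cons_append, List.zip_cons_cons, List.map_cons, List.sum_cons]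
    rw [ih a v0]
    show pvW x a + (pairSum v0 (a :: t) + pvW a v0)
      = (pvCross v0 x a + pairSum v0 (a :: t)) + pvW x v0
    simp [pvCross, pvW]
    ring

theorem pairSum_cons_self (v0 : Int × Int) (tl : List (Int × Int)) :
    pairSum v0 (v0 :: tl) = pairSum v0 tl := by
  cases tl with
  | nil => rfl
  | cons b t => show pvCross v0 v0 b + _ = _; rw [cross_self12]; ring

theorem area_pairSum (v0 : Int × Int) (tl : List (Int × Int)) :
    polygon_area_2 (v0 :: tl) = |pairSum v0 tl| := by
  rw [area_zip]
  congr 1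
  show (((v0 :: tl).zip (tl ++ [v0])).map (fun pq => pvW pq.1 pq.2)).sum = _
  rw [SZ_eq tl v0 v0, pairSum_cons_self]
  simp [pvW]

def AdjAll (v0 : Int × Int) : List (Int × Int) → Prop
  | a :: b :: t => 0 < pvCross v0 a b ∧ AdjAll v0 (b :: t)
  | _ => True

theorem pairSum_nonneg (v0 : Int × Int) :
    ∀ l : List (Int × Int), AdjAll v0 l → 0 ≤ pairSum v0 l
  | [] , _ => le_refl 0
  | [_], _ => le_refl 0
  | a :: b :: t, h => by
      have h2 := pairSum_nonneg v0 (b :: t) h.2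
      have h1 := h.1
      show 0 ≤ pvCross v0 a b + pairSum v0 (b :: t)
      omega

theorem pairSum_pos (v0 : Int × Int) (l : List (Int × Int)) (h : AdjAll v0 l)
    (hlen : 2 ≤ l.length) : 0 < pairSum v0 l := by
  match l, hlen with
  | a :: b :: t, _ =>
    have h2 := pairSum_nonneg v0 (b :: t) h.2
    have h1 := h.1
    show 0 < pvCross v0 a b + pairSum v0 (b :: t)
    omega

theorem adjAll_of_pairwise (v0 : Int × Int) :
    ∀ l : List (Int × Int), l.Pairwise (fun a b => 0 < pvCross v0 a b) → AdjAll v0 l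
  | [], _ => trivial
  | [_], _ => trivial
  | a :: b :: t, h => by
      refine ⟨(List.pairwise_cons.1 h).1 b (by simp), ?_⟩
      exact adjAll_of_pairwise v0 (b :: t) (List.pairwise_cons.1 h).2

theorem adjAll_append (v0 x : Int × Int) :
    ∀ (l1 l2 : List (Int × Int)), AdjAll v0 l1 →
      (∀ (h : l1 ≠ []), 0 < pvCross v0 (l1.getLast h) x) → AdjAll v0 (x :: l2) →
      AdjAll v0 (l1 ++ x :: l2)
  | [], l2, _, _, h3 => h3
  | [a], l2, _, h2, h3 => ⟨by simpa using h2 (by simp), h3⟩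
  | a :: b :: t, l2, h1, h2, h3 => by
      refine ⟨h1.1, ?_⟩
      have := adjAll_append v0 x (b :: t) l2 h1.2
        (fun h => by simpa [List.getLast_cons] using h2 (by simp)) h3
      simpa using this

theorem cross_swap23 (o a b : Int × Int) : pvCross o b a = -pvCross o a b := by
  simp [pvCross]; ring

theorem canon_eq (pts : List (Int × Int)) (n : Int) :
    pvB_canonical pts n = canonical_form pts n := by
  unfold pvB_canonical canonical_form
  rw [show PySem.List.pyRange 0 4 1 = [0, 1, 2, 3] from by decide]
  dsimp only [List.foldl, rotate_90, reflect_h]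
  simp only [List.map_map, List.nil_append, List.cons_append]
  simp only [Function.comp_def]
  ring_nf
  simp only [Prod.mk.eta, List.map_id']

theorem filter_struct (f : (Int × Int) → Bool) (l : List (Int × Int)) (a b : Int × Int)
    (m : List (Int × Int)) (hdec : l = a :: (m ++ [b])) (h1 : f a = true) (h2 : f b = true) :
    l.filter f = a :: (m.filter f ++ [b]) := by
  subst hdec
  rw [List.filter_cons, if_pos (by simp [h1]), List.filter_append]
  simp [h2]

theorem subset_main (n : Int) (S : List (Int × Int)) (mn mx : Int × Int) (mid : List (Int × Int))
    (hs : S.Pairwise LtP) (hdec : S = mn :: (mid ++ [mx])) (hmid : mid ≠ []) :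
    ((3 ≤ (convex_hull S).length ∧ 0 < polygon_area_2 (convex_hull S)) ∧
        (convex_hull S).length = S.length ↔ pvB_convex_position S = true)
    ∧ (pvB_convex_position S = true →
        canonical_form (convex_hull S) n = pvB_canonical S n) := by
  have hmn_mem : mn ∈ S := by rw [hdec]; simp
  have hmx_mem : mx ∈ S := by rw [hdec]; simp
  have hmid_mem : ∀ x ∈ mid, x ∈ S := fun x hx => by rw [hdec]; simp [hx]
  have hs' : (mn :: (mid ++ [mx])).Pairwise LtP := hdec ▸ hs
  have hlt_mn : ∀ x ∈ mid ++ [mx], LtP mn x := (List.pairwise_cons.1 hs').1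
  have hlt_mx : ∀ x ∈ mid, LtP x mx := fun x hx =>
    (List.pairwise_append.1 (List.pairwise_cons.1 hs').2).2.2 x hx mx (by simp)
  have hnotlt_mn : ∀ u ∈ S, ¬ LtP u mn := by
    intro u hu hlt
    rw [hdec] at hu
    rcases List.mem_cons.1 hu with rfl | hu'
    · exact ltp_irrefl hlt
    · exact ltp_asymm (hlt_mn u hu') hlt
  have hnotlt_mx : ∀ w ∈ S, ¬ LtP mx w := by
    intro w hw hlt
    rw [hdec] at hw
    rcases List.mem_cons.1 hw with rfl | hw'
    · exact ltp_asymm (hlt_mn mx (by simp)) hlt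
    · rcases List.mem_append.1 hw' with h1 | h1
      · exact ltp_asymm (hlt_mx w h1) hlt
      · simp at h1; subst h1; exact ltp_irrefl hlt
  have hfLmn : pvLowB S mn = true :=
    pvLowB_iff.2 (fun u hu w hw h1 _ => absurd h1 (hnotlt_mn u hu))
  have hfLmx : pvLowB S mx = true :=
    pvLowB_iff.2 (fun u hu w hw _ h2 => absurd h2 (hnotlt_mx w hw))
  have hfUmn : pvUpB S mn = true :=
    pvUpB_iff.2 (fun u hu w hw h1 _ => absurd h1 (hnotlt_mn u hu))
  have hfUmx : pvUpB S mx = true :=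
    pvUpB_iff.2 (fun u hu w hw _ h2 => absurd h2 (hnotlt_mx w hw))
  have hndS : S.Nodup := nodup_of_pairwise_ltp hs
  have hSlen : S.length = 2 + mid.length := by
    rw [hdec]; simp only [List.length_cons, List.length_append, List.length_nil]; omega
  have hmidlen : 1 ≤ mid.length := by
    cases hm : mid with
    | nil => exact absurd hm hmid
    | cons a t => simp
  -- structure of the two chains
  have hLstruct : S.filter (pvLowB S) = mn :: (mid.filter (pvLowB S) ++ [mx]) :=
    filter_struct (pvLowB S) S mn mx mid hdec hfLmn hfLmx
  have hSrev : S.reverse = mx :: (mid.reverse ++ [mn]) := by rw [hdec]; simp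
  have hUstruct : S.reverse.filter (pvUpB S) = mx :: (mid.reverse.filter (pvUpB S) ++ [mn]) :=
    filter_struct (pvUpB S) S.reverse mx mn mid.reverse hSrev hfUmx hfUmn
  have hhull : convex_hull S
      = mn :: (mid.filter (pvLowB S) ++ (mx :: mid.reverse.filter (pvUpB S))) := by
    unfold convex_hull
    dsimp only
    rw [sortedset_eq hs, if_neg (by rw [hSlen]; omega),
      PySem.List.slice_to_neg_one, PySem.List.slice_to_neg_one,
      LH_filter hs, UH_filter hs, hLstruct, hUstruct,
      ← List.cons_append, List.dropLast_concat,
      ← List.cons_append, List.dropLast_concat]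
    simp
  have hhull_len : (convex_hull S).length
      = 2 + (mid.filter (pvLowB S)).length + (mid.filter (pvUpB S)).length := by
    rw [hhull]
    simp [List.filter_reverse]
    omega
  have hex : ∀ x ∈ mid, ¬(pvLowB S x = true ∧ pvUpB S x = true) := by
    rintro x hx ⟨h1, h2⟩
    have hL := pvLowB_iff.1 h1 mn hmn_mem mx hmx_mem (hlt_mn x (List.mem_append.2 (Or.inl hx))) (hlt_mx x hx)
    have hU := pvUpB_iff.1 h2 mn hmn_mem mx hmx_mem (hlt_mn x (List.mem_append.2 (Or.inl hx))) (hlt_mx x hx)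
    omega
  have hQiff : (convex_hull S).length = S.length
      ↔ ∀ x ∈ mid, pvLowB S x = true ∨ pvUpB S x = true := by
    rw [hhull_len, hSlen]
    rw [show (2 + (mid.filter (pvLowB S)).length + (mid.filter (pvUpB S)).length = 2 + mid.length)
        ↔ ((mid.filter (pvLowB S)).length + (mid.filter (pvUpB S)).length = mid.length) from by omega]
    exact filter_two_eq_iff hex
  -- decode of B's predicate
  have hlo : PySem.List.pyGetD S 0 (0, 0) = mn := by
    rw [hdec]; exact PySem.List.pyGetD_zero_cons _ _ _
  have hhi : PySem.List.pyGetD S (-1) (0, 0) = mx := by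
    rw [hdec, ← List.cons_append, PySem.List.pyGetD_neg_one_append_singleton]
  have hmn_nmem : mn ∉ mid := by
    intro h
    have := (List.nodup_cons.1 (hdec ▸ hndS)).1
    exact this (by simp [h])
  have hmx_nmem : mx ∉ mid := by
    have h2 := (List.nodup_cons.1 (hdec ▸ hndS)).2
    intro h
    have := List.disjoint_of_nodup_append h2
    exact this h (by simp)
  have hBdecode : pvB_convex_position S = true
      ↔ ∀ x ∈ mid, pvLowB S x = true ∨ pvUpB S x = true := by
    unfold pvB_convex_position
    rw [if_neg (by rw [hSlen]; omega)]
    dsimp only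
    rw [hlo, hhi]
    rw [List.all_eq_true]
    constructor
    · intro h x hx
      have h2 := h x (hmid_mem x hx)
      rw [if_neg (by
        simp only [Bool.or_eq_true, beq_iff_eq]
        rintro (rfl | rfl)
        · exact hmn_nmem hx
        · exact hmx_nmem hx)] at h2
      rcases Bool.or_eq_true_iff.1 h2 with h3 | h3
      · exact Or.inl h3
      · exact Or.inr h3
    · intro h q hq
      by_cases hc : (q == mn || q == mx) = true
      · rw [if_pos hc]
      · rw [if_neg hc]
        show (pvLowB S q || pvUpB S q) = true
        simp only [Bool.or_eq_true, beq_iff_eq] at hc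
        have hqmid : q ∈ mid := by
          rw [hdec] at hq
          rcases List.mem_cons.1 hq with rfl | h1
          · exact absurd (Or.inl rfl) hc
          · rcases List.mem_append.1 h1 with h2 | h2
            · exact h2
            · simp at h2; exact absurd (Or.inr h2) hc
        rcases h q hqmid with h3 | h3
        · rw [h3]; rfl
        · rw [h3]; simp
  -- area positivity under Q
  have harea : (∀ x ∈ mid, pvLowB S x = true ∨ pvUpB S x = true) →
      0 < polygon_area_2 (convex_hull S) := by
    intro hQ
    rw [hhull, area_pairSum]
    refine abs_pos.2 (ne_of_gt ?_)
    have hmidpw : mid.Pairwise LtP := hs.sublist (by rw [hdec]; exact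
      ((List.sublist_append_left mid [mx]).cons mn))
    have hmemL : ∀ x ∈ mid.filter (pvLowB S), x ∈ mid := fun x hx =>
      (List.mem_filter.1 hx).1
    have hIsLmem : ∀ x ∈ mid.filter (pvLowB S), IsL S x := fun x hx =>
      pvLowB_iff.1 (List.mem_filter.1 hx).2
    have hAdj1 : AdjAll mn (mid.filter (pvLowB S)) := by
      refine adjAll_of_pairwise mn _ ?_
      refine List.Pairwise.imp_of_mem ?_ (hmidpw.sublist List.filter_sublist)
      intro a b ha hb hab
      exact hIsLmem a ha mn hmn_mem b (hmid_mem b (hmemL b hb))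
        (hlt_mn a (List.mem_append.2 (Or.inl (hmemL a ha)))) hab
    have hlastL : ∀ (h : mid.filter (pvLowB S) ≠ []),
        0 < pvCross mn ((mid.filter (pvLowB S)).getLast h) mx := by
      intro h
      have hmem := List.getLast_mem h
      exact hIsLmem _ hmem mn hmn_mem mx hmx_mem
        (hlt_mn _ (List.mem_append.2 (Or.inl (hmemL _ hmem)))) (hlt_mx _ (hmemL _ hmem))
    have hmemU : ∀ x ∈ mid.reverse.filter (pvUpB S), x ∈ mid := fun x hx => by
      have := (List.mem_filter.1 hx).1
      exact List.mem_reverse.1 this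
    have hIsUmem : ∀ x ∈ mid.reverse.filter (pvUpB S), IsU S x := fun x hx =>
      pvUpB_iff.1 (List.mem_filter.1 hx).2
    have hAdj2 : AdjAll mn (mx :: mid.reverse.filter (pvUpB S)) := by
      refine adjAll_of_pairwise mn _ ?_
      rw [List.pairwise_cons]
      constructor
      · intro u hu
        rw [show pvCross mn mx u = -pvCross mn u mx from cross_swap23 mn u mx]
        have := hIsUmem u hu mn hmn_mem mx hmx_mem
          (hlt_mn u (List.mem_append.2 (Or.inl (hmemU u hu)))) (hlt_mx u (hmemU u hu))
        omega
      · have hpwrev : (mid.reverse.filter (pvUpB S)).Pairwise (fun a b => LtP b a) := by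
          refine List.Pairwise.sublist List.filter_sublist ?_
          rw [List.pairwise_reverse]
          exact hmidpw
        refine List.Pairwise.imp_of_mem ?_ hpwrev
        intro a b ha hb hba
        rw [show pvCross mn a b = -pvCross mn b a from cross_swap23 mn b a]
        have := hIsUmem b hb mn hmn_mem a (hmid_mem a (hmemU a ha))
          (hlt_mn b (List.mem_append.2 (Or.inl (hmemU b hb)))) hba
        omega
    have hAdjAll := adjAll_append mn mx _ _ hAdj1 hlastL hAdj2
    refine pairSum_pos mn _ hAdjAll ?_
    have hcnt := (filter_two_eq_iff hex).2 hQ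
    have h1 : (mid.reverse.filter (pvUpB S)).length = (mid.filter (pvUpB S)).length := by
      rw [List.filter_reverse, List.length_reverse]
    simp only [List.length_append, List.length_cons, h1]
    omega
  -- permutation of the hull under Q
  have hperm : (∀ x ∈ mid, pvLowB S x = true ∨ pvUpB S x = true) →
      (convex_hull S).Perm S := by
    intro hQ
    have hUeq : mid.filter (pvUpB S) = mid.filter (fun x => !(pvLowB S x)) := by
      refine List.filter_congr ?_
      intro x hx
      rcases hQ x hx with h1 | h1
      · have h4 : ¬ pvUpB S x = true := fun h2 => hex x hx ⟨h1, h2⟩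
        rw [h1]
        revert h4
        cases pvUpB S x <;> simp
      · rw [h1]
        have h4 : ¬ pvLowB S x = true := fun h2 => hex x hx ⟨h2, h1⟩
        revert h4
        cases pvLowB S x <;> simp
    have s1 : (mid.filter (pvLowB S) ++ (mx :: mid.reverse.filter (pvUpB S))).Perm
        (mid.filter (pvLowB S) ++ (mid.reverse.filter (pvUpB S) ++ [mx])) :=
      List.Perm.append_left _ (List.perm_append_singleton mx _).symm
    have s2 : (mid.filter (pvLowB S) ++ (mid.reverse.filter (pvUpB S) ++ [mx])).Perm
        ((mid.filter (pvLowB S) ++ mid.filter (pvUpB S)) ++ [mx]) := by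
      rw [← List.append_assoc]
      refine List.Perm.append_right _ (List.Perm.append_left _ ?_)
      rw [List.filter_reverse]
      exact List.reverse_perm _
    have s3 : ((mid.filter (pvLowB S) ++ mid.filter (pvUpB S)) ++ [mx]).Perm (mid ++ [mx]) := by
      refine List.Perm.append_right _ ?_
      rw [hUeq]
      exact List.filter_append_perm _ mid
    have hp2 := (s1.trans s2).trans s3
    rw [hhull]
    refine (List.Perm.cons mn hp2).trans ?_
    rw [← hdec]
  refine ⟨?_, ?_⟩
  · constructor
    · rintro ⟨_, hleneq⟩
      exact hBdecode.2 (hQiff.1 hleneq)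
    · intro hB
      have hQ := hBdecode.1 hB
      have hleneq := hQiff.2 hQ
      exact ⟨⟨by rw [hleneq, hSlen]; omega, harea hQ⟩, hleneq⟩
  · intro hB
    have hQ := hBdecode.1 hB
    rw [canon_eq S n]
    refine canonical_form_perm n (hperm hQ) ?_
    exact ((hperm hQ).nodup_iff).2 hndS

theorem pairwise_flatMap_of {α β : Type} (l : List α) (f : α → List β) (R : β → β → Prop)
    (hl : l.Pairwise (fun i j => ∀ x ∈ f i, ∀ y ∈ f j, R x y))
    (hf : ∀ i ∈ l, (f i).Pairwise R) : (l.flatMap f).Pairwise R := by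
  induction l with
  | nil => simp
  | cons x t ih =>
    rw [List.flatMap_cons, List.pairwise_append]
    refine ⟨hf x (by simp), ih (List.pairwise_cons.1 hl).2 (fun i hi => hf i (by simp [hi])), ?_⟩
    intro a ha b hb
    obtain ⟨j, hj, hbj⟩ := List.mem_flatMap.1 hb
    exact (List.pairwise_cons.1 hl).1 j hj a ha b hbj

theorem grid_pairwise (n : Int) :
    ((PySem.List.pyRange 0 n 1).flatMap
      (fun i => (PySem.List.pyRange 0 n 1).map (fun j => (i, j)))).Pairwise LtP := by
  refine pairwise_flatMap_of _ _ _ ?_ ?_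
  · refine (PySem.List.pairwise_lt_pyRange_one 0 n).imp_of_mem ?_
    intro i i' _ _ hlt x hx y hy
    obtain ⟨j, _, rfl⟩ := List.mem_map.1 hx
    obtain ⟨j', _, rfl⟩ := List.mem_map.1 hy
    rw [ltp_iff]
    exact Or.inl hlt
  · intro i _
    rw [List.pairwise_map]
    refine (PySem.List.pairwise_lt_pyRange_one 0 n).imp ?_
    intro a b hab
    rw [ltp_iff]
    exact Or.inr ⟨rfl, hab⟩

theorem step_eq (n : Int) (grid : List (Int × Int)) (hg : grid.Pairwise LtP)
    (size : Int) (h3 : 3 ≤ size) (sh : PySem.Set (List (Int × Int)))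
    (subset : List (Int × Int)) (hmem : subset ∈ PySem.List.combinations grid size.toNat) :
    (let hull := convex_hull subset
     if 3 ≤ hull.length ∧ 0 < polygon_area_2 hull then
       if hull.length = subset.length then PySem.Set.add sh (canonical_form hull n) else sh
     else sh)
    = (if pvB_convex_position subset then PySem.Set.add sh (pvB_canonical subset n) else sh) := by
  obtain ⟨hsub, hlen⟩ := (PySem.List.mem_combinations_iff _ _ _).1 hmem
  have hsorted : subset.Pairwise LtP := List.Pairwise.sublist hsub hg
  have hlen3 : 3 ≤ subset.length := by rw [hlen]; omega
  obtain ⟨mn, mid0, mx, hdec0⟩ := decomp2 subset (by omega)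
  rw [List.cons_append] at hdec0
  have hmid : mid0 ≠ [] := by
    intro h
    rw [h] at hdec0
    rw [hdec0] at hlen3
    simp at hlen3
  have hmain := subset_main n subset mn mx mid0 hsorted hdec0 hmid
  dsimp only
  by_cases hB : pvB_convex_position subset = true
  · have hacc := hmain.1.2 hB
    rw [if_pos hacc.1, if_pos hacc.2, if_pos hB, hmain.2 hB]
  · by_cases h1 : 3 ≤ (convex_hull subset).length ∧ 0 < polygon_area_2 (convex_hull subset)
    · rw [if_pos h1]
      by_cases h2 : (convex_hull subset).length = subset.length
      · exact absurd (hmain.1.1 ⟨h1, h2⟩) hB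
      · rw [if_neg h2, if_neg (show ¬ pvB_convex_position subset = true from hB)]
    · rw [if_neg h1, if_neg (show ¬ pvB_convex_position subset = true from hB)]

theorem pv_main (n : Int) : count_geoboard_shapes n = count_geoboard_shapes_alt n := by
  unfold count_geoboard_shapes count_geoboard_shapes_alt
  dsimp only
  refine congrArg (fun l : PySem.Set (List (Int × Int)) => (l.length : Int)) ?_
  refine PySem.List.foldl_congr_mem _ _ _ _ ?_
  intro sh size hsz
  have h3 : 3 ≤ size := (PySem.List.mem_pyRange_one.1 hsz).1
  refine PySem.List.foldl_congr_mem _ _ _ _ ?_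
  intro sh' subset hsub
  exact step_eq n _ (grid_pairwise n) size h3 sh' subset hsub

-- ===== VERDICT (by name: the statement is the Claim_ definition above) =====
theorem count_geoboard_shapes_spec : Claim_equal_count_geoboard_shapes := by
  intro n _
  unfold Spec_count_geoboard_shapes
  exact pv_main n
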